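-- pv_equiv track=rewrite | github.com/bachsofttrick/algolysis-cs325 | hw7/MinPuzzle.py | minEffort
-- ===== SOURCE A (Python) =====
-- import heapq
--
-- def minEffort(puzzle):
--     m, n = len(puzzle), len(puzzle[0])
--     directions = [(0, 1), (0, -1), (1, 0), (-1, 0)]
--
--     # Helper function to check if a cell is within bounds
--     def is_valid(x, y):
--         return 0 <= x < m and 0 <= y < n
--
--     # Initialize distances matrix with infinity
--     distances = [[float('inf')] * n for _ in range(m)]
--     distances[0][0] = 0
--
--     # Priority queue to store cells based on their difference
--     pq = [(0, 0, 0)]  # (max_diff, x, y)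
--
--     while pq:
--         max_diff, x, y = heapq.heappop(pq)
--
--         # Destination reached
--         if x == m - 1 and y == n - 1:
--             return max_diff
--
--         for dx, dy in directions:
--             nx, ny = x + dx, y + dy
--             if is_valid(nx, ny):
--                 # Calculate the difference of the current move
--                 new_diff = max(max_diff, abs(puzzle[nx][ny] - puzzle[x][y]))
--                 if new_diff < distances[nx][ny]:
--                     distances[nx][ny] = new_diff
--                     heapq.heappush(pq, (new_diff, nx, ny))
--
--     # Destination unreachable
--     return -1
-- ===== SOURCE B (Python) =====
-- def minEffort(puzzle):
--     m, n = len(puzzle), len(puzzle[0])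
--     if m == 1 and n == 1:
--         return 0
--     # collect the distinct weights of all adjacent-cell edges
--     weights = set()
--     for x in range(m):
--         for y in range(n):
--             if x + 1 < m:
--                 weights.add(abs(puzzle[x + 1][y] - puzzle[x][y]))
--             if y + 1 < n:
--                 weights.add(abs(puzzle[x][y + 1] - puzzle[x][y]))
--     # the answer is the smallest threshold t whose <=t edges connect the corners
--     for t in sorted(weights):
--         if _connects(puzzle, m, n, t):
--             return t
--
-- def _connects(puzzle, m, n, t):
--     seen = [[False] * n for _ in range(m)]
--     seen[0][0] = True
--     stack = [(0, 0)]
--     while stack: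
--         x, y = stack.pop()
--         for nx, ny in ((x + 1, y), (x - 1, y), (x, y + 1), (x, y - 1)):
--             if 0 <= nx < m and 0 <= ny < n and not seen[nx][ny] \
--                     and abs(puzzle[nx][ny] - puzzle[x][y]) <= t:
--                 seen[nx][ny] = True
--                 stack.append((nx, ny))
--     return seen[m - 1][n - 1]
-- ===== Notes on version B (the rewrite author's own statement) =====
-- stated objective: alternative
-- what changed: Replaces lazy Dijkstra over (max-diff, x, y) heap entries by a threshold scan: collect the distinct adjacent-cell difference weights once, and return the smallest weight t for which a DFS flood fill restricted to edges of weight <= t connects cell (0,0) to cell (m-1,n-1).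
-- outside the precondition, e.g. on minEffort([[0, 0, 50], [0, 100], [0, 0, 0]]): A returns 0, B raises IndexError; on minEffort([[0, 0], [5]]): A raises IndexError, B raises IndexError
import Mathlib
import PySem

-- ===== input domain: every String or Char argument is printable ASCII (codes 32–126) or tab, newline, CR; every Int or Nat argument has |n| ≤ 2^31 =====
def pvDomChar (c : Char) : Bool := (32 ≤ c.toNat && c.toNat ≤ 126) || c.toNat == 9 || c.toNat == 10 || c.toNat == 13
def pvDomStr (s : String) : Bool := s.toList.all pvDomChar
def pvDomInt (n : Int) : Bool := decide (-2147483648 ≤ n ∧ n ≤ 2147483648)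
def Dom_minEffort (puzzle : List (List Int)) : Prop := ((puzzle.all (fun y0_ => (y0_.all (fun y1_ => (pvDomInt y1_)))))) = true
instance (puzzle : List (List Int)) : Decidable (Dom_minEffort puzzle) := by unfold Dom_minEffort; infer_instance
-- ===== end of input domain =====

-- B replaces A's lazy heap Dijkstra by an ascending scan of the distinct adjacent-cell
-- difference weights with a DFS flood fill deciding connectivity at each threshold
-- (alternative algorithm, similar cost).


-- ===== PORT A =====
-- puzzle[x][y]; exact where Python indexes legally (guaranteed by Pre_), default 0 elsewhere
def pvAt (puzzle : List (List Int)) (x y : Int) : Int :=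
  PySem.List.pyGetD (PySem.List.pyGetD puzzle x []) y 0

-- matrix read/write (list-of-lists, as Python's distances / seen matrices)
def pvMGet {α : Type} (mat : List (List α)) (x y : Int) (d : α) : α :=
  PySem.List.pyGetD (PySem.List.pyGetD mat x []) y d

def pvMSet {α : Type} (mat : List (List α)) (x y : Int) (v : α) : List (List α) :=
  PySem.List.pySetD mat x (PySem.List.pySetD (PySem.List.pyGetD mat x []) y v)

def pvDirs : List (Int × Int) := [(0,1),(0,-1),(1,0),(-1,0)]

-- Python tuple comparison (max_diff, x, y) <= …
def pvLexLe (a b : Int × Int × Int) : Bool :=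
  decide (a.1 < b.1 ∨ (a.1 = b.1 ∧ (a.2.1 < b.2.1 ∨ (a.2.1 = b.2.1 ∧ a.2.2 ≤ b.2.2))))

-- heapq.heappop pops the lexicographically least triple; the heap is modelled as the
-- multiset of its entries: findMin + erase of one occurrence is exactly that pop
def pvFindMin (c : Int × Int × Int) : List (Int × Int × Int) → Int × Int × Int
  | [] => c
  | h :: t => pvFindMin (if pvLexLe c h then c else h) t

-- body of A's `for dx, dy in directions` loop (float('inf') is modelled as none)
def pvRelaxA (puzzle : List (List Int)) (m n d0 x y : Int)
    (st : List (List (Option Int)) × List (Int × Int × Int)) (dir : Int × Int) :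
    List (List (Option Int)) × List (Int × Int × Int) :=
  let nx := x + dir.1
  let ny := y + dir.2
  if 0 ≤ nx ∧ nx < m ∧ 0 ≤ ny ∧ ny < n then
    let nd := max d0 |pvAt puzzle nx ny - pvAt puzzle x y|
    match pvMGet st.1 nx ny (none : Option Int) with
    | none => (pvMSet st.1 nx ny (some nd), st.2 ++ [(nd, nx, ny)])
    | some dv =>
      if nd < dv then (pvMSet st.1 nx ny (some nd), st.2 ++ [(nd, nx, ny)]) else st
  else st

-- A's while loop; the fuel argument is only a totality guard (proven sufficient under Pre_)
def pvLoopA (puzzle : List (List Int)) (m n : Int) :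
    Nat → List (List (Option Int)) × List (Int × Int × Int) → Int
  | 0, _ => -1
  | fuel+1, st =>
    match st.2 with
    | [] => -1
    | h :: tl =>
      let e := pvFindMin h tl
      if e.2.1 = m - 1 ∧ e.2.2 = n - 1 then e.1
      else pvLoopA puzzle m n fuel
        (pvDirs.foldl (fun s dir => pvRelaxA puzzle m n e.1 e.2.1 e.2.2 s dir)
          (st.1, (h :: tl).erase e))

def pvAbsSum (puzzle : List (List Int)) : Int :=
  puzzle.foldl (fun a r => r.foldl (fun a v => a + |v|) a) 0

def pvFuelA (puzzle : List (List Int)) (m n : Int) : Nat :=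
  ((m * n).toNat + 1) * ((2 * pvAbsSum puzzle).toNat + 2) + 2

def minEffort (puzzle : List (List Int)) : Int :=
  let m := PySem.List.len puzzle
  let n := PySem.List.len (PySem.List.pyGetD puzzle 0 [])
  let dist0 := pvMSet ((PySem.List.pyRange 0 m 1).map
      (fun _ => List.replicate n.toNat (none : Option Int))) 0 0 (some 0)
  pvLoopA puzzle m n (pvFuelA puzzle m n) (dist0, [(0, 0, 0)])

-- ===== PORT B =====
def pvDirsB : List (Int × Int) := [(1,0),(-1,0),(0,1),(0,-1)]

-- the set of distinct adjacent-cell difference weights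
def pvWeights (puzzle : List (List Int)) (m n : Int) : List Int :=
  (PySem.List.pyRange 0 m 1).foldl (fun w x =>
    (PySem.List.pyRange 0 n 1).foldl (fun w y =>
      let w1 := if x + 1 < m then PySem.Set.add w |pvAt puzzle (x+1) y - pvAt puzzle x y| else w
      if y + 1 < n then PySem.Set.add w1 |pvAt puzzle x (y+1) - pvAt puzzle x y| else w1) w) []

-- body of _connects's neighbour loop
def pvFloodStep (puzzle : List (List Int)) (m n t x y : Int)
    (st : List (List Bool) × List (Int × Int)) (d : Int × Int) :
    List (List Bool) × List (Int × Int) :=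
  let nx := x + d.1
  let ny := y + d.2
  if 0 ≤ nx ∧ nx < m ∧ 0 ≤ ny ∧ ny < n ∧ pvMGet st.1 nx ny false = false ∧
      |pvAt puzzle nx ny - pvAt puzzle x y| ≤ t then
    (pvMSet st.1 nx ny true, st.2 ++ [(nx, ny)])
  else st

-- _connects's while loop; stack.pop() takes the LAST element; fuel is a totality guard
def pvFloodLoop (puzzle : List (List Int)) (m n t : Int) :
    Nat → List (List Bool) × List (Int × Int) → List (List Bool)
  | 0, st => st.1
  | fuel+1, st =>
    match st.2 with
    | [] => st.1
    | h :: tl =>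
      let e := (h :: tl).getLast (List.cons_ne_nil h tl)
      pvFloodLoop puzzle m n t fuel
        (pvDirsB.foldl (fun s d => pvFloodStep puzzle m n t e.1 e.2 s d)
          (st.1, (h :: tl).dropLast))

def pvConnects (puzzle : List (List Int)) (m n t : Int) : Bool :=
  let seen0 := pvMSet ((PySem.List.pyRange 0 m 1).map
      (fun _ => List.replicate n.toNat false)) 0 0 true
  let fin := pvFloodLoop puzzle m n t ((m * n).toNat * 2 + 2) (seen0, [(0, 0)])
  pvMGet fin (m - 1) (n - 1) false

-- `for t in sorted(weights): if _connects(...): return t` (falls off only outside Pre_)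
def pvScanB (puzzle : List (List Int)) (m n : Int) : List Int → Int
  | [] => 0
  | c :: ws => if pvConnects puzzle m n c then c else pvScanB puzzle m n ws

def minEffort_alt (puzzle : List (List Int)) : Int :=
  let m := PySem.List.len puzzle
  let n := PySem.List.len (PySem.List.pyGetD puzzle 0 [])
  if m = 1 ∧ n = 1 then 0
  else pvScanB puzzle m n (PySem.List.sorted (pvWeights puzzle m n) (fun c => c) false)

-- ===== PRECONDITION & SPEC =====
-- Pre_ excludes the inputs where A raises (empty grid, empty first row, and it excludes all
-- grids with a row shorter than the first row: there A raises IndexError for every missing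
-- cell its search touches, and in the rare case it returns before touching one the value is
-- an accident of the traversal; B raises IndexError on such ragged grids.
def Pre_minEffort (puzzle : List (List Int)) : Prop :=
  puzzle ≠ [] ∧ 0 < (puzzle.headD []).length ∧
    ∀ row ∈ puzzle, (puzzle.headD []).length ≤ row.length

instance (puzzle : List (List Int)) : Decidable (Pre_minEffort puzzle) := by
  unfold Pre_minEffort; infer_instance

def pvWitness_minEffort : List (List Int) := [[0, 3], [7, 1]]

def Spec_minEffort (puzzle : List (List Int)) (out : Int) : Prop := out = minEffort_alt puzzle
instance (puzzle : List (List Int)) (out : Int) : Decidable (Spec_minEffort puzzle out) := by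
  unfold Spec_minEffort; infer_instance

-- ===== CLAIM (what is proved, stated in full; the proofs are below) =====
def Claim_equal_minEffort : Prop := ∀ (puzzle : List (List Int)), Dom_minEffort puzzle →
  Pre_minEffort puzzle → Spec_minEffort puzzle (minEffort puzzle)

-- ===== LEMMAS AND PROOFS =====

-- ---- the common specification layer: bottleneck reachability on the grid ----
def VC (m n : Int) (c : Int × Int) : Prop := 0 ≤ c.1 ∧ c.1 < m ∧ 0 ≤ c.2 ∧ c.2 < n

def AdjC (u v : Int × Int) : Prop :=
  (v.1 = u.1 + 1 ∧ v.2 = u.2) ∨ (v.1 = u.1 - 1 ∧ v.2 = u.2) ∨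
  (v.1 = u.1 ∧ v.2 = u.2 + 1) ∨ (v.1 = u.1 ∧ v.2 = u.2 - 1)

def diffAt (puzzle : List (List Int)) (u v : Int × Int) : Int :=
  |pvAt puzzle v.1 v.2 - pvAt puzzle u.1 u.2|

def EdgeC (puzzle : List (List Int)) (m n t : Int) (u v : Int × Int) : Prop :=
  VC m n u ∧ VC m n v ∧ AdjC u v ∧ diffAt puzzle u v ≤ t

inductive ReachC (puzzle : List (List Int)) (m n t : Int) : (Int × Int) → (Int × Int) → Prop
  | refl (u : Int × Int) : ReachC puzzle m n t u u
  | cons {u v w : Int × Int} : EdgeC puzzle m n t u v → ReachC puzzle m n t v w →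
      ReachC puzzle m n t u w

-- what both programs return: the minimal bottleneck level connecting the two corners
def GoodOut (puzzle : List (List Int)) (m n r : Int) : Prop :=
  0 ≤ r ∧ ReachC puzzle m n r (0, 0) (m - 1, n - 1) ∧
    ∀ t, 0 ≤ t → ReachC puzzle m n t (0, 0) (m - 1, n - 1) → r ≤ t

lemma goodOut_unique {puzzle m n r1 r2} (h1 : GoodOut puzzle m n r1)
    (h2 : GoodOut puzzle m n r2) : r1 = r2 := by
  obtain ⟨a1, b1, c1⟩ := h1; obtain ⟨a2, b2, c2⟩ := h2
  exact le_antisymm (c1 _ a2 b2) (c2 _ a1 b1)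

lemma reach_mono {puzzle m n t t' u v} (h : t ≤ t')
    (hr : ReachC puzzle m n t u v) : ReachC puzzle m n t' u v := by
  induction hr with
  | refl u => exact ReachC.refl u
  | cons he _ ih =>
    exact ReachC.cons ⟨he.1, he.2.1, he.2.2.1, le_trans he.2.2.2 h⟩ ih

lemma reach_snoc {puzzle m n t u v w} (h : ReachC puzzle m n t u v)
    (he : EdgeC puzzle m n t v w) : ReachC puzzle m n t u w := by
  induction h with
  | refl u => exact ReachC.cons he (ReachC.refl _)
  | cons he' _ ih => exact ReachC.cons he' (ih he)

lemma diffAt_comm (puzzle : List (List Int)) (u v : Int × Int) :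
    diffAt puzzle u v = diffAt puzzle v u := abs_sub_comm _ _

-- ---- bounds: every cell value is bounded by the absolute sum ----
lemma absSum_eq (puzzle : List (List Int)) :
    pvAbsSum puzzle = (puzzle.map (fun r => (r.map (fun v => |v|)).sum)).sum := by
  unfold pvAbsSum
  rw [show (List.foldl (fun a r => List.foldl (fun a v => a + |v|) a r) 0 puzzle) =
      List.foldl (fun a r => a + (r.map (fun v => |v|)).sum) 0 puzzle from
    PySem.List.foldl_congr_mem _ _ _ _ (fun acc x _ => PySem.List.foldl_add x (fun v => |v|) acc),
    PySem.List.foldl_add]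
  simp

lemma absSum_nonneg (puzzle : List (List Int)) : 0 ≤ pvAbsSum puzzle := by
  rw [absSum_eq]
  apply List.sum_nonneg
  intro x hx
  simp only [List.mem_map] at hx
  obtain ⟨r, _, rfl⟩ := hx
  apply List.sum_nonneg
  intro y hy
  simp only [List.mem_map] at hy
  obtain ⟨v, _, rfl⟩ := hy
  exact abs_nonneg v

lemma pvAt_abs_le (puzzle : List (List Int)) (x y : Int) :
    |pvAt puzzle x y| ≤ pvAbsSum puzzle := by
  have habs := absSum_nonneg puzzle
  unfold pvAt
  rcases hr : PySem.List.pyGet? puzzle x with _ | row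
  · rw [PySem.List.pyGetD_of_none _ _ _ hr, PySem.List.pyGetD_of_none]
    · simpa using habs
    · rw [PySem.List.pyGet?_eq_none_iff]; simp [PySem.Raise.InRange]
  · have hrow : row ∈ puzzle := PySem.List.mem_of_pyGet?_eq_some puzzle hr
    have hD : PySem.List.pyGetD puzzle x [] = row := by simp [PySem.List.pyGetD, hr]
    rw [hD]
    rcases hv : PySem.List.pyGet? row y with _ | v
    · rw [PySem.List.pyGetD_of_none _ _ _ hv]; simpa using habs
    · have hvrow : v ∈ row := PySem.List.mem_of_pyGet?_eq_some row hv
      have hDv : PySem.List.pyGetD row y 0 = v := by simp [PySem.List.pyGetD, hv]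
      rw [hDv, absSum_eq]
      have hnn1 : ∀ z ∈ row.map (fun w => |w|), 0 ≤ z := by
        intro z hz
        simp only [List.mem_map] at hz
        obtain ⟨w, _, rfl⟩ := hz
        exact abs_nonneg w
      have hnn2 : ∀ z ∈ puzzle.map (fun r => (r.map (fun w => |w|)).sum), 0 ≤ z := by
        intro z hz
        simp only [List.mem_map] at hz
        obtain ⟨r, _, rfl⟩ := hz
        refine List.sum_nonneg ?_
        intro w hw
        simp only [List.mem_map] at hw
        obtain ⟨w', _, rfl⟩ := hw
        exact abs_nonneg w'
      have h1 : |v| ≤ (row.map (fun w => |w|)).sum :=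
        List.single_le_sum hnn1 _ (List.mem_map_of_mem hvrow)
      have h2 : (row.map (fun w => |w|)).sum ≤
          (puzzle.map (fun r => (r.map (fun w => |w|)).sum)).sum :=
        List.single_le_sum hnn2 _ (List.mem_map_of_mem hrow)
      exact le_trans h1 h2

lemma diff_le_K (puzzle : List (List Int)) (u v : Int × Int) :
    diffAt puzzle u v ≤ 2 * pvAbsSum puzzle := by
  have h1 := pvAt_abs_le puzzle v.1 v.2
  have h2 := pvAt_abs_le puzzle u.1 u.2
  have h3 := abs_sub (pvAt puzzle v.1 v.2) (pvAt puzzle u.1 u.2)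
  unfold diffAt
  linarith

-- every valid cell is reachable at level 2*absSum (the grid is connected)
lemma all_reach (puzzle : List (List Int)) (m n : Int) :
    ∀ (k : Nat) (v : Int × Int), VC m n v → (v.1 + v.2).toNat ≤ k →
      ReachC puzzle m n (2 * pvAbsSum puzzle) (0, 0) v := by
  intro k
  induction k with
  | zero =>
    rintro ⟨vx, vy⟩ ⟨h1, h2, h3, h4⟩ hk
    have : vx = 0 ∧ vy = 0 := by simp at h1 h3 hk ⊢; omega
    obtain ⟨rfl, rfl⟩ := this
    exact ReachC.refl _
  | succ k ih =>
    rintro ⟨vx, vy⟩ ⟨h1, h2, h3, h4⟩ hk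
    by_cases h0 : vx = 0 ∧ vy = 0
    · obtain ⟨rfl, rfl⟩ := h0
      exact ReachC.refl _
    · simp only at h1 h2 h3 h4 hk
      have h0' : vx ≠ 0 ∨ vy ≠ 0 := by
        by_contra hc; push_neg at hc; exact h0 ⟨hc.1, hc.2⟩
      by_cases hx : 0 < vx
      · have hu : VC m n (vx - 1, vy) := by
          unfold VC; refine ⟨?_, ?_, ?_, ?_⟩ <;> simp <;> omega
        refine reach_snoc (v := (vx - 1, vy)) (ih _ hu ?_) ?_
        · show ((vx - 1) + vy).toNat ≤ k
          omega
        refine ⟨hu, ⟨h1, h2, h3, h4⟩, Or.inl ⟨?_, rfl⟩, diff_le_K puzzle _ _⟩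
        show vx = vx - 1 + 1
        omega
      · have hu : VC m n (vx, vy - 1) := by
          unfold VC; refine ⟨?_, ?_, ?_, ?_⟩ <;> simp <;> omega
        refine reach_snoc (v := (vx, vy - 1)) (ih _ hu ?_) ?_
        · show (vx + (vy - 1)).toNat ≤ k
          omega
        refine ⟨hu, ⟨h1, h2, h3, h4⟩, Or.inr (Or.inr (Or.inl ⟨rfl, ?_⟩)),
          diff_le_K puzzle _ _⟩
        show vy = vy - 1 + 1
        omega

-- ---- matrix helpers ----
def DimsM {α : Type} (m n : Int) (mat : List (List α)) : Prop :=
  mat.length = m.toNat ∧ ∀ r ∈ mat, r.length = n.toNat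

lemma dims_init {α : Type} (m n : Int) (v : α) :
    DimsM m n ((PySem.List.pyRange 0 m 1).map (fun _ => List.replicate n.toNat v)) := by
  constructor
  · simp [PySem.List.length_pyRange_one]
  · intro r hr
    simp only [List.mem_map] at hr
    obtain ⟨_, _, rfl⟩ := hr
    simp

lemma row_len {α : Type} {m n : Int} {mat : List (List α)} (hd : DimsM m n mat)
    {i : Nat} (hi : i < mat.length) : mat[i].length = n.toNat :=
  hd.2 _ (List.getElem_mem _)

lemma mset_eq {α : Type} {m n : Int} {mat : List (List α)} (hd : DimsM m n mat)
    {c : Int × Int} (h : VC m n c) (v : α) :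
    pvMSet mat c.1 c.2 v =
      mat.set c.1.toNat ((mat[c.1.toNat]'(by have := hd.1; obtain ⟨h1,h2,_,_⟩ := h; omega)).set c.2.toNat v) := by
  obtain ⟨h1, h2, h3, h4⟩ := h
  have hm := hd.1
  unfold pvMSet
  rw [PySem.List.pyGetD_eq_getElem mat [] h1 (by omega),
    PySem.List.pySetD_of_nonneg _ _ h3, PySem.List.pySetD_of_nonneg _ _ h1]

lemma dims_mset {α : Type} {m n : Int} {mat : List (List α)} (hd : DimsM m n mat)
    {c : Int × Int} (h : VC m n c) (v : α) : DimsM m n (pvMSet mat c.1 c.2 v) := by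
  rw [mset_eq hd h v]
  refine ⟨by simpa using hd.1, ?_⟩
  intro r hr
  rcases List.mem_or_eq_of_mem_set hr with hr | rfl
  · exact hd.2 _ hr
  · rw [List.length_set]
    exact row_len hd (by have := hd.1; obtain ⟨h1,h2,_,_⟩ := h; omega)

lemma mget_eq {α : Type} {m n : Int} {mat : List (List α)} (hd : DimsM m n mat)
    {c : Int × Int} (h : VC m n c) (d : α) :
    pvMGet mat c.1 c.2 d =
      (mat[c.1.toNat]'(by have := hd.1; obtain ⟨h1,h2,_,_⟩ := h; omega))[c.2.toNat]'(by
        have := hd.1; obtain ⟨h1,h2,h3,h4⟩ := h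
        rw [row_len hd (by omega)]; omega) := by
  obtain ⟨h1, h2, h3, h4⟩ := h
  have hm := hd.1
  unfold pvMGet
  rw [PySem.List.pyGetD_eq_getElem mat [] h1 (by omega),
    PySem.List.pyGetD_eq_getElem _ d h3]
  rw [row_len hd (by omega)]; omega

lemma mget_mset_same {α : Type} {m n : Int} {mat : List (List α)} (hd : DimsM m n mat)
    {c : Int × Int} (h : VC m n c) (v d : α) :
    pvMGet (pvMSet mat c.1 c.2 v) c.1 c.2 d = v := by
  have hd2 := dims_mset hd h v
  rw [mget_eq hd2 h d]
  simp only [mset_eq hd h v]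
  simp [List.getElem_set]

lemma mget_mset_other {α : Type} {m n : Int} {mat : List (List α)} (hd : DimsM m n mat)
    {c c' : Int × Int} (h : VC m n c) (h' : VC m n c') (hne : c' ≠ c) (v d : α) :
    pvMGet (pvMSet mat c.1 c.2 v) c'.1 c'.2 d = pvMGet mat c'.1 c'.2 d := by
  have hm := hd.1
  obtain ⟨a1,a2,a3,a4⟩ := h
  obtain ⟨b1,b2,b3,b4⟩ := h'
  have hx1 : c.1.toNat < mat.length := by omega
  have hx1' : c'.1.toNat < mat.length := by omega
  rw [mset_eq hd ⟨a1,a2,a3,a4⟩ v]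
  unfold pvMGet
  rw [PySem.List.pyGetD_eq_getElem _ [] b1 (by simpa using (by exact_mod_cast (by omega : c'.1 < (mat.length : Int)))),
    PySem.List.pyGetD_eq_getElem mat [] b1 (by omega),
    List.getElem_set]
  by_cases hx : c.1.toNat = c'.1.toNat
  · rw [if_pos hx]
    simp only [hx]
    have hy : c'.2.toNat ≠ c.2.toNat := by
      intro hy; apply hne; ext <;> omega
    have hrl : mat[c'.1.toNat].length = n.toNat := row_len hd hx1'
    rw [PySem.List.pyGetD_eq_getElem _ d b3 (by rw [List.length_set, hrl]; omega),
      PySem.List.pyGetD_eq_getElem _ d b3 (by rw [hrl]; omega),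
      List.getElem_set, if_neg (by omega)]
  · rw [if_neg hx]

lemma mget_init {α : Type} (m n : Int) (v : α) {c : Int × Int} (h : VC m n c) (d : α) :
    pvMGet ((PySem.List.pyRange 0 m 1).map (fun _ => List.replicate n.toNat v)) c.1 c.2 d = v := by
  rw [mget_eq (dims_init m n v) h d]
  have h1 : c.1.toNat < (PySem.List.pyRange 0 m 1).length := by
    rw [PySem.List.length_pyRange_one]; obtain ⟨a1,a2,_,_⟩ := h; omega
  simp only [List.getElem_map]
  rw [List.getElem_replicate]

-- ---- potential: a Nat measure that each loop iteration strictly decreases ----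
def pvSlackVal (K : Int) : Option Int → Nat
  | none => K.toNat + 1
  | some d => d.toNat

def pvSlack (K : Int) (dist : List (List (Option Int))) : Nat :=
  (dist.map (fun r => (r.map (pvSlackVal K)).sum)).sum

def pvUnSlack (seen : List (List Bool)) : Nat :=
  (seen.map (fun r => (r.map (fun b => if b then 0 else 2)).sum)).sum

lemma sum_map_set {α : Type} (f : α → Nat) (l : List α) (i : Nat) (v : α) (h : i < l.length) :
    ((l.set i v).map f).sum + f l[i] = (l.map f).sum + f v := by
  induction l generalizing i with
  | nil => simp at h
  | cons a t ih =>
    cases i with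
    | zero => simp [List.set]; omega
    | succ j =>
      simp only [List.set, List.map_cons, List.sum_cons, List.getElem_cons_succ]
      have := ih j (by simpa using h)
      omega

lemma sum_map_le {α : Type} (f : α → Nat) (b : Nat) (l : List α) (h : ∀ x ∈ l, f x ≤ b) :
    (l.map f).sum ≤ l.length * b := by
  induction l with
  | nil => simp
  | cons a t ih =>
    simp only [List.map_cons, List.sum_cons, List.length_cons]
    have h1 := h a List.mem_cons_self
    have h2 := ih (fun x hx => h x (List.mem_cons_of_mem a hx))
    calc f a + (t.map f).sum ≤ b + t.length * b := by omega
    _ = (t.length + 1) * b := by ring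

lemma mset_measure {α : Type} {m n : Int} {mat : List (List α)} (hd : DimsM m n mat)
    (f : α → Nat) {c : Int × Int} (h : VC m n c) (v : α) :
    ((pvMSet mat c.1 c.2 v).map (fun r => (r.map f).sum)).sum + f (pvMGet mat c.1 c.2 v) =
      (mat.map (fun r => (r.map f).sum)).sum + f v := by
  have hm := hd.1
  obtain ⟨a1, a2, a3, a4⟩ := h
  have hx : c.1.toNat < mat.length := by omega
  have hy : c.2.toNat < mat[c.1.toNat].length := by rw [row_len hd hx]; omega
  rw [mset_eq hd ⟨a1, a2, a3, a4⟩ v, mget_eq hd ⟨a1, a2, a3, a4⟩ v]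
  have A := sum_map_set (fun r => (r.map f).sum) mat c.1.toNat
    (mat[c.1.toNat].set c.2.toNat v) hx
  have B := sum_map_set f mat[c.1.toNat] c.2.toNat v hy
  simp only at A B
  omega

-- ===== A-side proof =====
lemma pvFindMin_mem : ∀ (l : List (Int × Int × Int)) (c), pvFindMin c l ∈ c :: l := by
  intro l
  induction l with
  | nil => intro c; simp [pvFindMin]
  | cons h t ih =>
    intro c
    have hmem := ih (if pvLexLe c h then c else h)
    simp only [pvFindMin]
    rcases List.mem_cons.1 hmem with he | ht
    · rw [he]
      by_cases hb : pvLexLe c h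
      · simp only [if_pos hb]
        exact List.mem_cons_self
      · simp only [if_neg hb]
        exact List.mem_cons.2 (Or.inr List.mem_cons_self)
    · exact List.mem_cons.2 (Or.inr (List.mem_cons.2 (Or.inr ht)))

lemma pvFindMin_le : ∀ (l : List (Int × Int × Int)) (c) (a), a ∈ c :: l →
    (pvFindMin c l).1 ≤ a.1 := by
  intro l
  induction l with
  | nil =>
    intro c a ha
    simp at ha
    simp [pvFindMin, ha]
  | cons h t ih =>
    intro c a ha
    have hkey : (if pvLexLe c h then c else h).1 ≤ c.1 ∧
        (if pvLexLe c h then c else h).1 ≤ h.1 := by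
      by_cases hb : pvLexLe c h
      · simp only [if_pos hb]
        simp only [pvLexLe, decide_eq_true_iff] at hb
        exact ⟨le_refl _, by omega⟩
      · simp only [if_neg hb]
        simp only [pvLexLe, decide_eq_true_iff] at hb
        push_neg at hb
        exact ⟨by omega, le_refl _⟩
    have hhead := ih (if pvLexLe c h then c else h) _ List.mem_cons_self
    simp only [pvFindMin]
    rcases List.mem_cons.1 ha with rfl | ha2
    · have := hkey.1; omega
    rcases List.mem_cons.1 ha2 with rfl | ha3
    · have := hkey.2; omega
    · exact ih _ _ (List.mem_cons_of_mem _ ha3)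

structure InvA (puzzle : List (List Int)) (m n K : Int)
    (dist : List (List (Option Int))) (pq : List (Int × Int × Int)) : Prop where
  dims : DimsM m n dist
  entries : ∀ e ∈ pq, VC m n (e.2.1, e.2.2) ∧ 0 ≤ e.1 ∧ e.1 ≤ K ∧
    ReachC puzzle m n e.1 (0, 0) (e.2.1, e.2.2) ∧
    ∃ dv, pvMGet dist e.2.1 e.2.2 (none : Option Int) = some dv ∧ dv ≤ e.1
  vals : ∀ c, VC m n c → ∀ dv, pvMGet dist c.1 c.2 (none : Option Int) = some dv →
    0 ≤ dv ∧ dv ≤ K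
  src : pvMGet dist 0 0 (none : Option Int) = some 0
  relaxed : ∀ c, VC m n c → ∀ d, pvMGet dist c.1 c.2 (none : Option Int) = some d →
    (∃ e ∈ pq, e.2.1 = c.1 ∧ e.2.2 = c.2 ∧ e.1 ≤ d) ∨
    (∀ v, VC m n v → AdjC c v → ∃ dv, pvMGet dist v.1 v.2 (none : Option Int) = some dv ∧
      dv ≤ max d (diffAt puzzle c v))
  destEntry : ∀ d, pvMGet dist (m - 1) (n - 1) (none : Option Int) = some d →
    ∃ e ∈ pq, e.2.1 = m - 1 ∧ e.2.2 = n - 1 ∧ e.1 ≤ d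

-- the cut argument: any valid level-t witness to the corner leaves an entry ≤ t in the heap
lemma chase_aux {puzzle m n K dist pq} (inv : InvA puzzle m n K dist pq) :
    ∀ (t : Int) (w z : Int × Int), ReachC puzzle m n t w z → z = (m - 1, n - 1) →
      ∀ (dw : Int), pvMGet dist w.1 w.2 (none : Option Int) = some dw → dw ≤ t →
      ∃ a ∈ pq, a.1 ≤ t ∧ ReachC puzzle m n t (a.2.1, a.2.2) (m - 1, n - 1) := by
  intro t w z hreach
  induction hreach with
  | refl u =>
    rintro rfl dw hget hle
    obtain ⟨a, ha, ha1, ha2, ha3⟩ := inv.destEntry dw hget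
    refine ⟨a, ha, by omega, ?_⟩
    have : (a.2.1, a.2.2) = ((m - 1 : Int), (n - 1 : Int)) := by
      rw [ha1, ha2]
    rw [this]
    exact ReachC.refl _
  | cons he hr ih =>
    rename_i u v z'
    rintro rfl dw hget hle
    obtain ⟨hu, hv, hadj, hdle⟩ := he
    rcases inv.relaxed u hu dw hget with ⟨a, ha, ha1, ha2, ha3⟩ | hall
    · refine ⟨a, ha, by omega, ?_⟩
      have : (a.2.1, a.2.2) = u := by rw [ha1, ha2]
      rw [this]
      exact ReachC.cons ⟨hu, hv, hadj, hdle⟩ hr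
    · obtain ⟨dv, hdv, hdvle⟩ := hall v hv hadj
      have hmax : max dw (diffAt puzzle u v) ≤ t := max_le hle hdle
      exact ih rfl dv hdv (by omega)

lemma chase {puzzle m n K dist pq} (inv : InvA puzzle m n K dist pq) :
    ∀ (t : Int) (w : Int × Int) (dw : Int), pvMGet dist w.1 w.2 (none : Option Int) = some dw →
      dw ≤ t → ReachC puzzle m n t w (m - 1, n - 1) →
      ∃ a ∈ pq, a.1 ≤ t ∧ ReachC puzzle m n t (a.2.1, a.2.2) (m - 1, n - 1) := by
  intro t w dw hget hle hr
  exact chase_aux inv t w _ hr rfl dw hget hle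

-- the relation between the state before and after the relaxation fold
structure RelaxRel (puzzle : List (List Int)) (m n K d0 x y : Int)
    (st0 st : List (List (Option Int)) × List (Int × Int × Int)) : Prop where
  dims : DimsM m n st.1
  bnd : ∀ c, VC m n c → ∀ dv, pvMGet st.1 c.1 c.2 (none : Option Int) = some dv →
    0 ≤ dv ∧ dv ≤ K
  dec : ∀ c, VC m n c → ∀ dv, pvMGet st0.1 c.1 c.2 (none : Option Int) = some dv →
    ∃ dv', pvMGet st.1 c.1 c.2 (none : Option Int) = some dv' ∧ dv' ≤ dv
  chg : ∀ c, VC m n c →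
    pvMGet st.1 c.1 c.2 (none : Option Int) = pvMGet st0.1 c.1 c.2 (none : Option Int) ∨
    (AdjC (x, y) c ∧ ∃ dv', pvMGet st.1 c.1 c.2 (none : Option Int) = some dv' ∧
      dv' ≤ max d0 (diffAt puzzle (x, y) c) ∧ (dv', c.1, c.2) ∈ st.2 ∧
      (pvMGet st0.1 c.1 c.2 (none : Option Int) = none ∨
        ∃ dv0, pvMGet st0.1 c.1 c.2 (none : Option Int) = some dv0 ∧ dv' < dv0))
  sub : ∀ e ∈ st0.2, e ∈ st.2
  new : ∀ e ∈ st.2, e ∈ st0.2 ∨ (VC m n (e.2.1, e.2.2) ∧ AdjC (x, y) (e.2.1, e.2.2) ∧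
    e.1 = max d0 (diffAt puzzle (x, y) (e.2.1, e.2.2)) ∧
    ∃ dv', pvMGet st.1 e.2.1 e.2.2 (none : Option Int) = some dv' ∧ dv' ≤ e.1)
  phi : st.2.length + pvSlack K st.1 ≤ st0.2.length + pvSlack K st0.1

lemma relaxRel_refl {puzzle m n K d0 x y st0} (hd : DimsM m n st0.1)
    (hb : ∀ c, VC m n c → ∀ dv, pvMGet st0.1 c.1 c.2 (none : Option Int) = some dv →
      0 ≤ dv ∧ dv ≤ K) : RelaxRel puzzle m n K d0 x y st0 st0 := by
  refine ⟨hd, hb, ?_, ?_, fun e he => he, fun e he => Or.inl he, le_refl _⟩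
  · intro c hc dv hdv
    exact ⟨dv, hdv, le_refl _⟩
  · intro c hc
    exact Or.inl rfl

lemma relaxRel_trans {puzzle m n K d0 x y st0 st1 st2}
    (h1 : RelaxRel puzzle m n K d0 x y st0 st1)
    (h2 : RelaxRel puzzle m n K d0 x y st1 st2) : RelaxRel puzzle m n K d0 x y st0 st2 := by
  refine ⟨h2.dims, h2.bnd, ?_, ?_, fun e he => h2.sub e (h1.sub e he), ?_, le_trans h2.phi h1.phi⟩
  · intro c hc dv hdv
    obtain ⟨dv1, hdv1, hle1⟩ := h1.dec c hc dv hdv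
    obtain ⟨dv2, hdv2, hle2⟩ := h2.dec c hc dv1 hdv1
    exact ⟨dv2, hdv2, by omega⟩
  · intro c hc
    rcases h2.chg c hc with he2 | ⟨hadj, dv', hg2, hle2, hmem2, hev2⟩
    · rcases h1.chg c hc with he1 | ⟨hadj, dv', hg1, hle1, hmem1, hev1⟩
      · exact Or.inl (he2.trans he1)
      · exact Or.inr ⟨hadj, dv', he2.trans hg1, hle1, h2.sub _ hmem1, hev1⟩
    · refine Or.inr ⟨hadj, dv', hg2, hle2, hmem2, ?_⟩
      rcases hg0 : pvMGet st0.1 c.1 c.2 (none : Option Int) with _ | dv0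
      · exact Or.inl rfl
      · obtain ⟨dv1, hdv1, hle1⟩ := h1.dec c hc dv0 hg0
        rcases hev2 with hnone | ⟨dv1', hdv1', hlt⟩
        · rw [hdv1] at hnone; exact absurd hnone (by simp)
        · rw [hdv1] at hdv1'
          injection hdv1' with heq
          exact Or.inr ⟨dv0, rfl, by omega⟩
  · intro e he
    rcases h2.new e he with he1 | ⟨hvc, hadj, hkey, dv', hg, hle⟩
    · rcases h1.new e he1 with he0 | ⟨hvc, hadj, hkey, dv', hg, hle⟩
      · exact Or.inl he0
      · obtain ⟨dv2, hdv2, hle2⟩ := h2.dec _ hvc dv' hg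
        exact Or.inr ⟨hvc, hadj, hkey, dv2, hdv2, by omega⟩
    · exact Or.inr ⟨hvc, hadj, hkey, dv', hg, hle⟩

lemma dirs_adj (x y : Int) {dir : Int × Int} (hdir : dir ∈ pvDirs) :
    AdjC (x, y) (x + dir.1, y + dir.2) := by
  simp only [pvDirs, List.mem_cons, List.not_mem_nil, or_false] at hdir
  unfold AdjC
  rcases hdir with rfl | rfl | rfl | rfl <;> simp <;> omega

lemma adj_cases {x y : Int} {v : Int × Int} (h : AdjC (x, y) v) :
    v = (x, y + 1) ∨ v = (x, y - 1) ∨ v = (x + 1, y) ∨ v = (x - 1, y) := by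
  obtain ⟨vx, vy⟩ := v
  simp only [Prod.mk.injEq]
  rcases h with ⟨h1, h2⟩ | ⟨h1, h2⟩ | ⟨h1, h2⟩ | ⟨h1, h2⟩ <;> simp only at h1 h2 <;> omega

-- one successful relaxation (value improved, entry pushed), characterised
lemma relax_push {puzzle : List (List Int)} {m n K d0 x y nx ny : Int}
    {st : List (List (Option Int)) × List (Int × Int × Int)}
    (hd : DimsM m n st.1)
    (hb : ∀ c, VC m n c → ∀ dv, pvMGet st.1 c.1 c.2 (none : Option Int) = some dv →
      0 ≤ dv ∧ dv ≤ K)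
    (hd0 : 0 ≤ d0) (hd0K : d0 ≤ K)
    (hdiff : ∀ u v, diffAt puzzle u v ≤ K)
    (hadj : AdjC (x, y) (nx, ny)) (hvc : VC m n (nx, ny))
    (hev : pvMGet st.1 nx ny (none : Option Int) = none ∨
      ∃ dv0, pvMGet st.1 nx ny (none : Option Int) = some dv0 ∧
        max d0 (diffAt puzzle (x, y) (nx, ny)) < dv0) :
    RelaxRel puzzle m n K d0 x y st
      (pvMSet st.1 nx ny (some (max d0 (diffAt puzzle (x, y) (nx, ny)))),
        st.2 ++ [(max d0 (diffAt puzzle (x, y) (nx, ny)), nx, ny)]) := by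
  set nd := max d0 (diffAt puzzle (x, y) (nx, ny)) with hnd
  have hnd0 : 0 ≤ nd := le_trans hd0 (le_max_left _ _)
  have hndK : nd ≤ K := max_le hd0K (hdiff _ _)
  refine ⟨?_, ?_, ?_, ?_, ?_, ?_, ?_⟩
  · exact dims_mset hd hvc _
  · intro c hc dv hdv
    by_cases hceq : c = (nx, ny)
    · subst hceq
      rw [mget_mset_same hd hvc _ _] at hdv
      injection hdv with hdv
      omega
    · rw [mget_mset_other hd hvc hc hceq _ _] at hdv
      exact hb c hc dv hdv
  · intro c hc dv hdv
    by_cases hceq : c = (nx, ny)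
    · subst hceq
      rcases hev with hnone | ⟨dv0, hsome, hlt⟩
      · rw [hdv] at hnone; exact absurd hnone (by simp)
      · rw [hdv] at hsome
        injection hsome with hsome
        exact ⟨nd, mget_mset_same hd hvc _ _, by omega⟩
    · exact ⟨dv, by rw [mget_mset_other hd hvc hc hceq _ _]; exact hdv, le_refl _⟩
  · intro c hc
    by_cases hceq : c = (nx, ny)
    · subst hceq
      refine Or.inr ⟨hadj, nd, mget_mset_same hd hvc _ _, le_refl _, ?_, hev⟩
      exact List.mem_append.2 (Or.inr (List.mem_singleton.2 rfl))
    · exact Or.inl (mget_mset_other hd hvc hc hceq _ _)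
  · intro e he
    exact List.mem_append.2 (Or.inl he)
  · intro e he
    rcases List.mem_append.1 he with he | he
    · exact Or.inl he
    · rw [List.mem_singleton.1 he]
      exact Or.inr ⟨hvc, hadj, rfl, nd, mget_mset_same hd hvc _ _, le_refl _⟩
  · have hmeq := mset_measure hd (pvSlackVal K) hvc (some nd)
    have hdef : pvMGet st.1 nx ny (some nd) = pvMGet st.1 nx ny (none : Option Int) := by
      rw [mget_eq hd hvc, mget_eq hd hvc]
    rw [hdef] at hmeq
    dsimp only at hmeq
    show (st.2 ++ [(nd, nx, ny)]).length + pvSlack K (pvMSet st.1 nx ny (some nd)) ≤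
      st.2.length + pvSlack K st.1
    rw [List.length_append, List.length_singleton]
    unfold pvSlack
    rcases hev with hnone | ⟨dv0, hsome, hlt⟩
    · rw [hnone] at hmeq
      simp only [pvSlackVal] at hmeq
      omega
    · rw [hsome] at hmeq
      simp only [pvSlackVal] at hmeq
      have h0dv0 : 0 ≤ dv0 := (hb _ hvc dv0 hsome).1
      omega

-- one pvRelaxA application, characterised
lemma relax_one {puzzle : List (List Int)} {m n K d0 x y : Int}
    {st : List (List (Option Int)) × List (Int × Int × Int)}
    (hd : DimsM m n st.1)
    (hb : ∀ c, VC m n c → ∀ dv, pvMGet st.1 c.1 c.2 (none : Option Int) = some dv →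
      0 ≤ dv ∧ dv ≤ K)
    (hd0 : 0 ≤ d0) (hd0K : d0 ≤ K)
    (hdiff : ∀ u v, diffAt puzzle u v ≤ K) {dir : Int × Int} (hdir : dir ∈ pvDirs) :
    RelaxRel puzzle m n K d0 x y st (pvRelaxA puzzle m n d0 x y st dir) ∧
    (VC m n (x + dir.1, y + dir.2) →
      ∃ dv', pvMGet (pvRelaxA puzzle m n d0 x y st dir).1 (x + dir.1) (y + dir.2)
          (none : Option Int) = some dv' ∧
        dv' ≤ max d0 (diffAt puzzle (x, y) (x + dir.1, y + dir.2))) := by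
  have hadj : AdjC (x, y) (x + dir.1, y + dir.2) := dirs_adj x y hdir
  by_cases hg : 0 ≤ x + dir.1 ∧ x + dir.1 < m ∧ 0 ≤ y + dir.2 ∧ y + dir.2 < n
  · have hvc : VC m n (x + dir.1, y + dir.2) := hg
    have hdiffeq : diffAt puzzle (x, y) (x + dir.1, y + dir.2) =
        |pvAt puzzle (x + dir.1) (y + dir.2) - pvAt puzzle x y| := rfl
    rcases hget : pvMGet st.1 (x + dir.1) (y + dir.2) (none : Option Int) with _ | dv
    · have heq : pvRelaxA puzzle m n d0 x y st dir =
        (pvMSet st.1 (x + dir.1) (y + dir.2)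
            (some (max d0 (diffAt puzzle (x, y) (x + dir.1, y + dir.2)))),
          st.2 ++ [(max d0 (diffAt puzzle (x, y) (x + dir.1, y + dir.2)), x + dir.1, y + dir.2)]) := by
        simp only [pvRelaxA, if_pos hg, hget, hdiffeq]
      rw [heq]
      refine ⟨relax_push hd hb hd0 hd0K hdiff hadj hvc (Or.inl hget), ?_⟩
      intro _
      exact ⟨_, mget_mset_same hd hvc _ _, le_refl _⟩
    · by_cases hlt : max d0 |pvAt puzzle (x + dir.1) (y + dir.2) - pvAt puzzle x y| < dv
      · have heq : pvRelaxA puzzle m n d0 x y st dir =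
          (pvMSet st.1 (x + dir.1) (y + dir.2)
              (some (max d0 (diffAt puzzle (x, y) (x + dir.1, y + dir.2)))),
            st.2 ++ [(max d0 (diffAt puzzle (x, y) (x + dir.1, y + dir.2)), x + dir.1, y + dir.2)]) := by
          simp only [pvRelaxA, if_pos hg, hget, if_pos hlt, hdiffeq]
        rw [heq]
        refine ⟨relax_push hd hb hd0 hd0K hdiff hadj hvc
          (Or.inr ⟨dv, hget, by rw [hdiffeq]; exact hlt⟩), ?_⟩
        intro _
        exact ⟨_, mget_mset_same hd hvc _ _, le_refl _⟩
      · have heq : pvRelaxA puzzle m n d0 x y st dir = st := by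
          simp only [pvRelaxA, if_pos hg, hget, if_neg hlt]
        rw [heq]
        refine ⟨relaxRel_refl hd hb, ?_⟩
        intro _
        exact ⟨dv, hget, by rw [hdiffeq]; omega⟩
  · have heq : pvRelaxA puzzle m n d0 x y st dir = st := by
      simp only [pvRelaxA, if_neg hg]
    rw [heq]
    exact ⟨relaxRel_refl hd hb, fun hvc => absurd hvc hg⟩

-- the full fold over the four directions
lemma relax_fold {puzzle : List (List Int)} {m n K d0 x y : Int}
    {st0 : List (List (Option Int)) × List (Int × Int × Int)} (hd : DimsM m n st0.1)
    (hb : ∀ c, VC m n c → ∀ dv, pvMGet st0.1 c.1 c.2 (none : Option Int) = some dv →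
      0 ≤ dv ∧ dv ≤ K)
    (hK : 0 ≤ K) (hd0 : 0 ≤ d0) (hd0K : d0 ≤ K)
    (hdiff : ∀ u v, diffAt puzzle u v ≤ K) :
    RelaxRel puzzle m n K d0 x y st0
      (pvDirs.foldl (fun s dir => pvRelaxA puzzle m n d0 x y s dir) st0) ∧
    (∀ v, VC m n v → AdjC (x, y) v →
      ∃ dv', pvMGet (pvDirs.foldl (fun s dir => pvRelaxA puzzle m n d0 x y s dir) st0).1
          v.1 v.2 (none : Option Int) = some dv' ∧
        dv' ≤ max d0 (diffAt puzzle (x, y) v)) := by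
  have hfold : pvDirs.foldl (fun s dir => pvRelaxA puzzle m n d0 x y s dir) st0 =
      pvRelaxA puzzle m n d0 x y (pvRelaxA puzzle m n d0 x y (pvRelaxA puzzle m n d0 x y
        (pvRelaxA puzzle m n d0 x y st0 (0,1)) (0,-1)) (1,0)) (-1,0) := by
    simp only [pvDirs, List.foldl_cons, List.foldl_nil]
  have h1 := relax_one (st := st0) (x := x) (y := y) hd hb hd0 hd0K hdiff (dir := (0,1)) (by simp [pvDirs])
  have r1 := h1.1
  have h2 := relax_one (x := x) (y := y) r1.dims r1.bnd hd0 hd0K hdiff (dir := ((0 : Int),(-1 : Int))) (by simp [pvDirs])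
  have r2 := h2.1
  have h3 := relax_one (x := x) (y := y) r2.dims r2.bnd hd0 hd0K hdiff (dir := ((1 : Int),(0 : Int))) (by simp [pvDirs])
  have r3 := h3.1
  have h4 := relax_one (x := x) (y := y) r3.dims r3.bnd hd0 hd0K hdiff (dir := ((-1 : Int),(0 : Int))) (by simp [pvDirs])
  have r4 := h4.1
  rw [hfold]
  constructor
  · exact relaxRel_trans r1 (relaxRel_trans r2 (relaxRel_trans r3 r4))
  · intro v hvc hadjv
    rcases adj_cases hadjv with rfl | rfl | rfl | rfl
    · -- v = (x, y + 1), relaxed by the first direction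
      have hv' : VC m n (x + (0 : Int), y + (1 : Int)) := by simpa using hvc
      obtain ⟨dv', hg1, hle1⟩ := h1.2 hv'
      simp only [add_zero] at hg1 hle1
      have R := relaxRel_trans r2 (relaxRel_trans r3 r4)
      obtain ⟨dv2, hg2, hle2⟩ := R.dec (x, y + 1) hvc dv' hg1
      exact ⟨dv2, hg2, by omega⟩
    · -- v = (x, y - 1), second direction
      have hv' : VC m n (x + (0 : Int), y + (-1 : Int)) := by
        simpa [sub_eq_add_neg] using hvc
      obtain ⟨dv', hg1, hle1⟩ := h2.2 hv'
      simp only [add_zero, ← sub_eq_add_neg] at hg1 hle1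
      have R := relaxRel_trans r3 r4
      obtain ⟨dv2, hg2, hle2⟩ := R.dec (x, y - 1) hvc dv' hg1
      exact ⟨dv2, hg2, by omega⟩
    · -- v = (x + 1, y), third direction
      have hv' : VC m n (x + (1 : Int), y + (0 : Int)) := by simpa using hvc
      obtain ⟨dv', hg1, hle1⟩ := h3.2 hv'
      simp only [add_zero] at hg1 hle1
      obtain ⟨dv2, hg2, hle2⟩ := r4.dec (x + 1, y) hvc dv' hg1
      exact ⟨dv2, hg2, by omega⟩
    · -- v = (x - 1, y), fourth direction
      have hv' : VC m n (x + (-1 : Int), y + (0 : Int)) := by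
        simpa [sub_eq_add_neg] using hvc
      obtain ⟨dv', hg1, hle1⟩ := h4.2 hv'
      simp only [add_zero, ← sub_eq_add_neg] at hg1 hle1
      exact ⟨dv', hg1, by omega⟩

-- one iteration of A's loop preserves the invariant and decreases the potential
lemma invA_step {puzzle : List (List Int)} {m n K : Int} {dist : List (List (Option Int))}
    {h : Int × Int × Int} {tl : List (Int × Int × Int)}
    (inv : InvA puzzle m n K dist (h :: tl)) (hm : 1 ≤ m) (hn : 1 ≤ n) (hK : 0 ≤ K)
    (hdiff : ∀ u v, diffAt puzzle u v ≤ K)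
    {e : Int × Int × Int} (he : e = pvFindMin h tl)
    (hnd : ¬ (e.2.1 = m - 1 ∧ e.2.2 = n - 1))
    {st' : List (List (Option Int)) × List (Int × Int × Int)}
    (hst' : st' = pvDirs.foldl (fun s dir => pvRelaxA puzzle m n e.1 e.2.1 e.2.2 s dir)
      (dist, (h :: tl).erase e)) :
    InvA puzzle m n K st'.1 st'.2 ∧
      st'.2.length + pvSlack K st'.1 + 1 ≤ (h :: tl).length + pvSlack K dist := by
  have hmem : e ∈ h :: tl := by rw [he]; exact pvFindMin_mem tl h
  obtain ⟨evc, e0, eK, ereach, dvU, hdvU, hdvUle⟩ := inv.entries e hmem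
  have hRF := relax_fold (st0 := (dist, (h :: tl).erase e)) (x := e.2.1) (y := e.2.2)
    (d0 := e.1) inv.dims inv.vals hK e0 eK hdiff
  rw [← hst'] at hRF
  obtain ⟨R, F5⟩ := hRF
  have hvc00 : VC m n ((0 : Int), (0 : Int)) := ⟨le_refl _, by omega, le_refl _, by omega⟩
  have hvcdest : VC m n ((m - 1 : Int), (n - 1 : Int)) := ⟨by omega, by omega, by omega, by omega⟩
  constructor
  · refine ⟨R.dims, ?_, R.bnd, ?_, ?_, ?_⟩
    · -- entries
      intro a ha
      rcases R.new a ha with ha0 | ⟨hvc, hadj, hkey, dv', hg, hle⟩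
      · have hamem : a ∈ h :: tl := List.mem_of_mem_erase ha0
        obtain ⟨avc, a0, aK, areach, dv, hdv, hdvle⟩ := inv.entries a hamem
        obtain ⟨dv2, hdv2, hle2⟩ := R.dec _ avc dv hdv
        exact ⟨avc, a0, aK, areach, dv2, hdv2, by omega⟩
      · have hkd : diffAt puzzle (e.2.1, e.2.2) (a.2.1, a.2.2) ≤ a.1 := by
          rw [hkey]; exact le_max_right _ _
        have hek : e.1 ≤ a.1 := by rw [hkey]; exact le_max_left _ _
        refine ⟨hvc, by omega, by rw [hkey]; exact max_le eK (hdiff _ _), ?_, dv', hg, hle⟩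
        exact reach_snoc (reach_mono hek ereach) ⟨evc, hvc, hadj, hkd⟩
    · -- src
      rcases R.chg (0, 0) hvc00 with hchg | ⟨_, dv', hg, _, _, hev⟩
      · rw [hchg]; exact inv.src
      · rcases hev with hnone | ⟨dv0, hsome, hlt⟩
        · rw [inv.src] at hnone; exact absurd hnone (by simp)
        · rw [inv.src] at hsome
          injection hsome with hsome
          have := (R.bnd (0, 0) hvc00 dv' hg).1
          omega
    · -- relaxed
      intro c hc d hg4
      rcases R.chg c hc with hchg | ⟨hadj, dv', hg', hle', hmem', hev⟩
      · have hg0 : pvMGet dist c.1 c.2 (none : Option Int) = some d := by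
          rw [← hchg]; exact hg4
        rcases inv.relaxed c hc d hg0 with ⟨w, hw, hw1, hw2, hw3⟩ | hall
        · by_cases hwe : w = e
          · subst hwe
            -- the popped entry was the witness: the cell is now fully relaxed
            have hceq : c = (w.2.1, w.2.2) := by
              ext
              · rw [hw1]
              · rw [hw2]
            have hdE : d = dvU := by
              rw [hceq] at hg0
              rw [hg0] at hdvU
              injection hdvU with hh
            have hde : d = w.1 := by omega
            refine Or.inr ?_
            intro v hvv hadjv
            obtain ⟨dv2, hg2, hle2⟩ := F5 v hvv (by rw [hceq] at hadjv; exact hadjv)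
            refine ⟨dv2, hg2, ?_⟩
            rw [hde, hceq]
            exact hle2
          · refine Or.inl ⟨w, R.sub w ?_, hw1, hw2, hw3⟩
            exact (List.mem_erase_of_ne hwe).2 hw
        · refine Or.inr ?_
          intro v hvv hadjv
          obtain ⟨dv, hdv, hdvle⟩ := hall v hvv hadjv
          obtain ⟨dv2, hdv2, hle2⟩ := R.dec v hvv dv hdv
          exact ⟨dv2, hdv2, by omega⟩
      · have hd' : d = dv' := by
          rw [hg4] at hg'
          injection hg' with hg''
        subst hd'
        exact Or.inl ⟨(d, c.1, c.2), hmem', rfl, rfl, le_refl _⟩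
    · -- destEntry
      intro d hg4
      rcases R.chg (m - 1, n - 1) hvcdest with hchg | ⟨hadj, dv', hg', hle', hmem', hev⟩
      · have hg0 : pvMGet dist (m - 1) (n - 1) (none : Option Int) = some d := by
          have := hg4
          rw [hchg] at this
          exact this
        obtain ⟨w, hw, hw1, hw2, hw3⟩ := inv.destEntry d hg0
        have hwe : w ≠ e := by
          intro hwe
          exact hnd ⟨by rw [← hwe]; exact hw1, by rw [← hwe]; exact hw2⟩
        exact ⟨w, R.sub w ((List.mem_erase_of_ne hwe).2 hw), hw1, hw2, hw3⟩
      · dsimp only at hg' hmem'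
        have hd' : d = dv' := by
          rw [hg4] at hg'
          injection hg' with hg''
        subst hd'
        exact ⟨(d, m - 1, n - 1), hmem', rfl, rfl, le_refl _⟩
  · -- potential decrease
    have hphi := R.phi
    have hlen : ((h :: tl).erase e).length = (h :: tl).length - 1 :=
      List.length_erase_of_mem hmem
    have hpos : 1 ≤ (h :: tl).length := by simp
    dsimp only at hphi
    omega

lemma loopA_good {puzzle : List (List Int)} {m n K : Int}
    (hm : 1 ≤ m) (hn : 1 ≤ n) (hK : 0 ≤ K)
    (hdiff : ∀ u v, diffAt puzzle u v ≤ K)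
    (hall : ∀ v, VC m n v → ReachC puzzle m n K (0, 0) v) :
    ∀ (fuel : Nat) (dist : List (List (Option Int))) (pq : List (Int × Int × Int)),
      InvA puzzle m n K dist pq → pq.length + pvSlack K dist < fuel →
      GoodOut puzzle m n (pvLoopA puzzle m n fuel (dist, pq)) := by
  have hvcdest : VC m n ((m - 1 : Int), (n - 1 : Int)) := ⟨by omega, by omega, by omega, by omega⟩
  intro fuel
  induction fuel with
  | zero =>
    intro dist pq inv hphi
    exact absurd hphi (by omega)
  | succ fuel ih =>
    intro dist pq inv hphi
    rcases pq with _ | ⟨h, tl⟩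
    · exfalso
      obtain ⟨a, ha, _, _⟩ := chase inv K (0, 0) 0 inv.src hK (hall (m - 1, n - 1) hvcdest)
      simp at ha
    · have hloop : pvLoopA puzzle m n (fuel + 1) (dist, h :: tl) =
          if (pvFindMin h tl).2.1 = m - 1 ∧ (pvFindMin h tl).2.2 = n - 1 then (pvFindMin h tl).1
          else pvLoopA puzzle m n fuel
            (pvDirs.foldl (fun s dir => pvRelaxA puzzle m n (pvFindMin h tl).1
              (pvFindMin h tl).2.1 (pvFindMin h tl).2.2 s dir) (dist, (h :: tl).erase (pvFindMin h tl))) := by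
        simp only [pvLoopA]
      by_cases hdest : (pvFindMin h tl).2.1 = m - 1 ∧ (pvFindMin h tl).2.2 = n - 1
      · rw [hloop, if_pos hdest]
        obtain ⟨evc, e0, eK, ereach, _⟩ := inv.entries _ (pvFindMin_mem tl h)
        refine ⟨e0, ?_, ?_⟩
        · have hco : (((pvFindMin h tl).2.1 : Int), ((pvFindMin h tl).2.2 : Int)) =
              ((m - 1 : Int), (n - 1 : Int)) := by rw [hdest.1, hdest.2]
          rw [← hco]
          exact ereach
        · intro t ht hreach
          by_contra hlt
          push_neg at hlt
          obtain ⟨a, ha, hale, _⟩ := chase inv t (0, 0) 0 inv.src ht hreach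
          have := pvFindMin_le tl h a ha
          omega
      · rw [hloop, if_neg hdest]
        set stN := pvDirs.foldl (fun s dir => pvRelaxA puzzle m n (pvFindMin h tl).1
          (pvFindMin h tl).2.1 (pvFindMin h tl).2.2 s dir)
          (dist, (h :: tl).erase (pvFindMin h tl)) with hstN
        obtain ⟨inv', hphi'⟩ := invA_step inv hm hn hK hdiff rfl hdest hstN
        exact ih stN.1 stN.2 inv' (by omega)

lemma minEffort_good (puzzle : List (List Int)) (hpre : Pre_minEffort puzzle) :
    GoodOut puzzle (PySem.List.len puzzle)
      (PySem.List.len (PySem.List.pyGetD puzzle 0 [])) (minEffort puzzle) := by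
  obtain ⟨hne, hrow, hlen⟩ := hpre
  rcases puzzle with _ | ⟨r0, rest⟩
  · exact absurd rfl hne
  have hget0 : PySem.List.pyGetD (r0 :: rest) 0 [] = r0 := by
    simp [PySem.List.pyGetD, PySem.List.pyGet?_zero_cons]
  have hhead : (r0 :: rest).headD [] = r0 := rfl
  set puzzle := r0 :: rest with hpz
  set m := PySem.List.len puzzle with hmdef
  set n := PySem.List.len (PySem.List.pyGetD puzzle 0 []) with hndef
  have hmlen : m = (puzzle.length : Int) := PySem.List.len_eq puzzle
  have hnlen : n = (r0.length : Int) := by rw [hndef, hget0]; exact PySem.List.len_eq r0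
  have hm : 1 ≤ m := by rw [hmlen, hpz]; simp
  have hn : 1 ≤ n := by rw [hnlen]; rw [hhead] at hrow; omega
  set K := 2 * pvAbsSum puzzle with hKdef
  have hK : 0 ≤ K := by have := absSum_nonneg puzzle; omega
  have hdiff : ∀ u v, diffAt puzzle u v ≤ K := fun u v => diff_le_K puzzle u v
  have hall : ∀ v, VC m n v → ReachC puzzle m n K (0, 0) v :=
    fun v hv => all_reach puzzle m n ((v.1 + v.2).toNat) v hv (le_refl _)
  have hvc00 : VC m n ((0 : Int), (0 : Int)) := ⟨le_refl _, by omega, le_refl _, by omega⟩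
  have hdinit := dims_init (α := Option Int) m n none
  have hd0 : DimsM m n (pvMSet ((PySem.List.pyRange 0 m 1).map
      (fun _ => List.replicate n.toNat (none : Option Int))) 0 0 (some 0)) :=
    dims_mset hdinit hvc00 _
  have hsrc : pvMGet (pvMSet ((PySem.List.pyRange 0 m 1).map
      (fun _ => List.replicate n.toNat (none : Option Int))) 0 0 (some 0)) 0 0
      (none : Option Int) = some 0 := mget_mset_same hdinit hvc00 _ _
  have hother : ∀ c : Int × Int, VC m n c → c ≠ (0, 0) →
      pvMGet (pvMSet ((PySem.List.pyRange 0 m 1).map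
        (fun _ => List.replicate n.toNat (none : Option Int))) 0 0 (some 0)) c.1 c.2
        (none : Option Int) = none := by
    intro c hc hcne
    rw [mget_mset_other hdinit hvc00 hc hcne _ _]
    exact mget_init m n none hc _
  have inv0 : InvA puzzle m n K (pvMSet ((PySem.List.pyRange 0 m 1).map
      (fun _ => List.replicate n.toNat (none : Option Int))) 0 0 (some 0)) [(0, 0, 0)] := by
    refine ⟨hd0, ?_, ?_, hsrc, ?_, ?_⟩
    · intro e hemem
      rw [List.mem_singleton] at hemem
      subst hemem
      exact ⟨hvc00, le_refl _, hK, ReachC.refl _, 0, hsrc, le_refl _⟩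
    · intro c hc dv hdv
      by_cases hceq : c = (0, 0)
      · subst hceq
        rw [hsrc] at hdv
        injection hdv with hdv
        omega
      · rw [hother c hc hceq] at hdv
        exact absurd hdv (by simp)
    · intro c hc d hd
      by_cases hceq : c = (0, 0)
      · subst hceq
        rw [hsrc] at hd
        injection hd with hd
        exact Or.inl ⟨(0, 0, 0), List.mem_singleton.2 rfl, rfl, rfl, by omega⟩
      · rw [hother c hc hceq] at hd
        exact absurd hd (by simp)
    · intro d hd
      by_cases hceq : ((m - 1 : Int), (n - 1 : Int)) = ((0 : Int), (0 : Int))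
      · have hm1 : m - 1 = 0 := by
          have := congrArg Prod.fst hceq
          simpa using this
        have hn1 : n - 1 = 0 := by
          have := congrArg Prod.snd hceq
          simpa using this
        rw [hm1, hn1, hsrc] at hd
        injection hd with hd
        refine ⟨(0, 0, 0), List.mem_singleton.2 rfl, ?_, ?_, ?_⟩
        · show (0 : Int) = m - 1
          omega
        · show (0 : Int) = n - 1
          omega
        · show (0 : Int) ≤ d
          omega
      · rw [hother (m - 1, n - 1) ⟨by omega, by omega, by omega, by omega⟩ hceq] at hd
        exact absurd hd (by simp)
  have hslackbound : pvSlack K (pvMSet ((PySem.List.pyRange 0 m 1).map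
      (fun _ => List.replicate n.toNat (none : Option Int))) 0 0 (some 0)) ≤
      m.toNat * (n.toNat * (K.toNat + 1)) := by
    unfold pvSlack
    have hlenrows : (pvMSet ((PySem.List.pyRange 0 m 1).map
        (fun _ => List.replicate n.toNat (none : Option Int))) 0 0 (some 0)).length = m.toNat :=
      hd0.1
    rw [← hlenrows]
    apply sum_map_le
    intro r hr
    have hrl : r.length = n.toNat := hd0.2 r hr
    rw [← hrl]
    apply sum_map_le
    intro o ho
    rcases o with _ | d
    · simp [pvSlackVal]
    · -- every stored value in the initial matrix is 0
      have hval : d = 0 := by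
        rw [mset_eq hdinit hvc00 _] at hr
        rcases List.mem_or_eq_of_mem_set hr with hr | rfl
        · simp only [List.mem_map] at hr
          obtain ⟨_, _, rfl⟩ := hr
          have := List.eq_of_mem_replicate ho
          exact absurd this (by simp)
        · rcases List.mem_or_eq_of_mem_set ho with ho | ho
          · simp only [List.getElem_map] at ho
            have := List.eq_of_mem_replicate ho
            exact absurd this (by simp)
          · injection ho with ho
      subst hval
      simp [pvSlackVal]
  have hfuel : [(0, 0, 0)].length + pvSlack K (pvMSet ((PySem.List.pyRange 0 m 1).map
      (fun _ => List.replicate n.toNat (none : Option Int))) 0 0 (some 0)) <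
      pvFuelA puzzle m n := by
    unfold pvFuelA
    rw [← hKdef]
    have hmn : (m * n).toNat = m.toNat * n.toNat := by
      rw [hmlen, hnlen]
      rw [← Int.natCast_mul]
      exact Int.toNat_natCast _
    rw [List.length_singleton, hmn]
    generalize hA : m.toNat * n.toNat = A at *
    generalize hS : K.toNat = S at *
    have h1 : pvSlack K (pvMSet ((PySem.List.pyRange 0 m 1).map
        (fun _ => List.replicate n.toNat (none : Option Int))) 0 0 (some 0)) ≤ A * (S + 1) := by
      rw [← hA]
      calc _ ≤ m.toNat * (n.toNat * (S + 1)) := hslackbound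
      _ = m.toNat * n.toNat * (S + 1) := by ring
    have h2 : (A + 1) * (S + 2) = A * (S + 1) + A + S + 2 := by ring
    omega
  have : minEffort puzzle = pvLoopA puzzle m n (pvFuelA puzzle m n)
      (pvMSet ((PySem.List.pyRange 0 m 1).map
        (fun _ => List.replicate n.toNat (none : Option Int))) 0 0 (some 0), [(0, 0, 0)]) := rfl
  rw [this]
  exact loopA_good hm hn hK hdiff hall _ _ _ inv0 hfuel

-- ===== B-side proof =====
-- the per-cell body of the weight-collection loop
def pvWStep (puzzle : List (List Int)) (m n x : Int) (w : List Int) (y : Int) : List Int :=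
  let w1 := if x + 1 < m then PySem.Set.add w |pvAt puzzle (x+1) y - pvAt puzzle x y| else w
  if y + 1 < n then PySem.Set.add w1 |pvAt puzzle x (y+1) - pvAt puzzle x y| else w1

lemma weights_eq (puzzle : List (List Int)) (m n : Int) :
    pvWeights puzzle m n = (PySem.List.pyRange 0 m 1).foldl
      (fun w x => (PySem.List.pyRange 0 n 1).foldl (pvWStep puzzle m n x) w) [] := rfl

lemma mem_add_left {s : List Int} {a : Int} (b : Int) (h : a ∈ s) : a ∈ PySem.Set.add s b :=
  (PySem.Set.mem_add s b a).2 (Or.inl h)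

lemma subset_wstep (puzzle : List (List Int)) (m n x : Int) (w : List Int) (y : Int)
    {a : Int} (h : a ∈ w) : a ∈ pvWStep puzzle m n x w y := by
  unfold pvWStep
  by_cases h1 : x + 1 < m <;> by_cases h2 : y + 1 < n <;>
    simp only [if_pos, if_neg, h1, h2, if_true, if_false] <;>
    first
      | exact mem_add_left _ (mem_add_left _ h)
      | exact mem_add_left _ h
      | exact h

lemma subset_wfold_inner (puzzle : List (List Int)) (m n x : Int) :
    ∀ (l : List Int) (w : List Int) {a : Int}, a ∈ w →
      a ∈ l.foldl (pvWStep puzzle m n x) w := by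
  intro l
  induction l with
  | nil => intro w a h; exact h
  | cons y tl ih => intro w a h; exact ih _ (subset_wstep puzzle m n x w y h)

lemma subset_wfold_outer (puzzle : List (List Int)) (m n : Int) :
    ∀ (l : List Int) (w : List Int) {a : Int}, a ∈ w →
      a ∈ l.foldl (fun w x => (PySem.List.pyRange 0 n 1).foldl (pvWStep puzzle m n x) w) w := by
  intro l
  induction l with
  | nil => intro w a h; exact h
  | cons x tl ih => intro w a h; exact ih _ (subset_wfold_inner puzzle m n x _ w h)

lemma wstep_nonneg (puzzle : List (List Int)) (m n x : Int) (w : List Int) (y : Int)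
    (hw : ∀ a ∈ w, 0 ≤ a) : ∀ a ∈ pvWStep puzzle m n x w y, 0 ≤ a := by
  intro a ha
  unfold pvWStep at ha
  have hw1 : ∀ a, (a ∈ (if x + 1 < m then
      PySem.Set.add w |pvAt puzzle (x+1) y - pvAt puzzle x y| else w)) → 0 ≤ a := by
    intro a ha
    by_cases h1 : x + 1 < m
    · rw [if_pos h1] at ha
      rcases (PySem.Set.mem_add _ _ _).1 ha with ha | rfl
      · exact hw _ ha
      · exact abs_nonneg _
    · rw [if_neg h1] at ha
      exact hw _ ha
  by_cases h2 : y + 1 < n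
  · rw [if_pos h2] at ha
    rcases (PySem.Set.mem_add _ _ _).1 ha with ha | rfl
    · exact hw1 _ ha
    · exact abs_nonneg _
  · rw [if_neg h2] at ha
    exact hw1 _ ha

lemma weights_nonneg (puzzle : List (List Int)) (m n : Int) :
    ∀ c ∈ pvWeights puzzle m n, 0 ≤ c := by
  rw [weights_eq]
  have inner : ∀ (x : Int) (l w : List Int), (∀ a ∈ w, 0 ≤ a) →
      ∀ a ∈ l.foldl (pvWStep puzzle m n x) w, 0 ≤ a := by
    intro x l
    induction l with
    | nil => intro w hw; exact hw
    | cons y tl ih => intro w hw; exact ih _ (wstep_nonneg puzzle m n x w y hw)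
  have outer : ∀ (l : List Int) (w : List Int), (∀ a ∈ w, 0 ≤ a) →
      ∀ a ∈ l.foldl (fun w x => (PySem.List.pyRange 0 n 1).foldl (pvWStep puzzle m n x) w) w,
        0 ≤ a := by
    intro l
    induction l with
    | nil => intro w hw; exact hw
    | cons x tl ih => intro w hw; exact ih _ (inner x _ w hw)
  exact outer _ [] (by simp)

lemma mem_wstep_down {puzzle : List (List Int)} {m n : Int} (x y : Int) (w : List Int)
    (h1 : x + 1 < m) :
    |pvAt puzzle (x+1) y - pvAt puzzle x y| ∈ pvWStep puzzle m n x w y := by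
  unfold pvWStep
  have hbase : |pvAt puzzle (x+1) y - pvAt puzzle x y| ∈
      (if x + 1 < m then PySem.Set.add w |pvAt puzzle (x+1) y - pvAt puzzle x y| else w) := by
    rw [if_pos h1]
    exact (PySem.Set.mem_add _ _ _).2 (Or.inr rfl)
  by_cases h2 : y + 1 < n
  · rw [if_pos h2]
    exact mem_add_left _ hbase
  · rw [if_neg h2]
    exact hbase

lemma mem_wstep_right {puzzle : List (List Int)} {m n : Int} (x y : Int) (w : List Int)
    (h2 : y + 1 < n) :
    |pvAt puzzle x (y+1) - pvAt puzzle x y| ∈ pvWStep puzzle m n x w y := by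
  unfold pvWStep
  rw [if_pos h2]
  exact (PySem.Set.mem_add _ _ _).2 (Or.inr rfl)

lemma mem_inner_fold {puzzle : List (List Int)} {m n : Int} (x : Int) :
    ∀ (l : List Int) (w : List Int), ∀ y0 ∈ l, ∀ {a : Int},
      (∀ w', a ∈ pvWStep puzzle m n x w' y0) → a ∈ l.foldl (pvWStep puzzle m n x) w := by
  intro l
  induction l with
  | nil => intro w y0 hy0; simp at hy0
  | cons y tl ih =>
    intro w y0 hy0 a hstep
    rcases List.mem_cons.1 hy0 with rfl | hy0'
    · exact subset_wfold_inner puzzle m n x tl _ (hstep w)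
    · exact ih _ y0 hy0' hstep

lemma mem_outer_fold {puzzle : List (List Int)} {m n : Int} :
    ∀ (l : List Int) (w : List Int), ∀ x0 ∈ l, ∀ {a : Int},
      (∀ w', a ∈ (PySem.List.pyRange 0 n 1).foldl (pvWStep puzzle m n x0) w') →
      a ∈ l.foldl (fun w x => (PySem.List.pyRange 0 n 1).foldl (pvWStep puzzle m n x) w) w := by
  intro l
  induction l with
  | nil => intro w x0 hx0; simp at hx0
  | cons x tl ih =>
    intro w x0 hx0 a hstep
    rcases List.mem_cons.1 hx0 with rfl | hx0'
    · exact subset_wfold_outer puzzle m n tl _ (hstep w)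
    · exact ih _ x0 hx0' hstep

lemma mem_weights_down {puzzle : List (List Int)} {m n : Int} {x y : Int}
    (hx0 : 0 ≤ x) (hx1 : x + 1 < m) (hy0 : 0 ≤ y) (hy1 : y < n) :
    |pvAt puzzle (x+1) y - pvAt puzzle x y| ∈ pvWeights puzzle m n := by
  rw [weights_eq]
  refine mem_outer_fold _ [] x (PySem.List.mem_pyRange_one.2 ⟨hx0, by omega⟩) ?_
  intro w'
  refine mem_inner_fold x _ w' y (PySem.List.mem_pyRange_one.2 ⟨hy0, hy1⟩) ?_
  intro w''
  exact mem_wstep_down x y w'' hx1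

lemma mem_weights_right {puzzle : List (List Int)} {m n : Int} {x y : Int}
    (hx0 : 0 ≤ x) (hx1 : x < m) (hy0 : 0 ≤ y) (hy1 : y + 1 < n) :
    |pvAt puzzle x (y+1) - pvAt puzzle x y| ∈ pvWeights puzzle m n := by
  rw [weights_eq]
  refine mem_outer_fold _ [] x (PySem.List.mem_pyRange_one.2 ⟨hx0, hx1⟩) ?_
  intro w'
  refine mem_inner_fold x _ w' y (PySem.List.mem_pyRange_one.2 ⟨hy0, by omega⟩) ?_
  intro w''
  exact mem_wstep_right x y w'' hy1

lemma weights_complete (puzzle : List (List Int)) (m n : Int) {u v : Int × Int}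
    (hu : VC m n u) (hv : VC m n v) (ha : AdjC u v) :
    diffAt puzzle u v ∈ pvWeights puzzle m n := by
  obtain ⟨ux, uy⟩ := u
  obtain ⟨a1, a2, a3, a4⟩ := hu
  simp only at a1 a2 a3 a4
  rcases adj_cases ha with rfl | rfl | rfl | rfl
  · obtain ⟨_, _, _, b4⟩ := hv
    exact mem_weights_right a1 a2 a3 (by simpa using b4)
  · obtain ⟨_, _, b3, _⟩ := hv
    simp only at b3
    rw [diffAt_comm]
    show |pvAt puzzle ux uy - pvAt puzzle ux (uy - 1)| ∈ pvWeights puzzle m n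
    have e1 : uy = (uy - 1) + 1 := by omega
    rw [e1]
    have := mem_weights_right (puzzle := puzzle) (m := m) (n := n) (x := ux) (y := uy - 1) a1 a2 b3 (show (uy - 1) + 1 < n by omega)
    simpa using this
  · obtain ⟨_, b2, _, _⟩ := hv
    exact mem_weights_down a1 (by simpa using b2) a3 a4
  · obtain ⟨b1, _, _, _⟩ := hv
    simp only at b1
    rw [diffAt_comm]
    show |pvAt puzzle ux uy - pvAt puzzle (ux - 1) uy| ∈ pvWeights puzzle m n
    have e1 : ux = (ux - 1) + 1 := by omega
    rw [e1]
    have := mem_weights_down (puzzle := puzzle) (m := m) (n := n) (x := ux - 1) (y := uy) b1 (show (ux - 1) + 1 < m by omega) a3 a4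
    simpa using this

lemma reach_bottleneck {puzzle m n t u v} (h : ReachC puzzle m n t u v) :
    u = v ∨ ∃ c, c ∈ pvWeights puzzle m n ∧ 0 ≤ c ∧ c ≤ t ∧ ReachC puzzle m n c u v := by
  induction h with
  | refl u => exact Or.inl rfl
  | cons he hr ih =>
    rename_i u' v' w'
    right
    obtain ⟨hvu, hvv, hadj, hdle⟩ := he
    have hdW : diffAt puzzle u' v' ∈ pvWeights puzzle m n :=
      weights_complete puzzle m n hvu hvv hadj
    have hd0 : 0 ≤ diffAt puzzle u' v' := abs_nonneg _
    rcases ih with rfl | ⟨c, hcW, hc0, hct, hcr⟩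
    · exact ⟨diffAt puzzle u' v', hdW, hd0, hdle,
        ReachC.cons ⟨hvu, hvv, hadj, le_refl _⟩ (ReachC.refl _)⟩
    · refine ⟨max (diffAt puzzle u' v') c, ?_, le_trans hc0 (le_max_right _ _),
        max_le hdle hct, ReachC.cons ⟨hvu, hvv, hadj, le_max_left _ _⟩
          (reach_mono (le_max_right _ _) hcr)⟩
      rcases max_choice (diffAt puzzle u' v') c with hmax | hmax <;> rw [hmax]
      · exact hdW
      · exact hcW

structure InvB (puzzle : List (List Int)) (m n t : Int)
    (seen : List (List Bool)) (stack : List (Int × Int)) : Prop where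
  dims : DimsM m n seen
  sound : ∀ c, VC m n c → pvMGet seen c.1 c.2 false = true → ReachC puzzle m n t (0, 0) c
  stackMem : ∀ c ∈ stack, VC m n c ∧ pvMGet seen c.1 c.2 false = true
  closure : ∀ c, VC m n c → pvMGet seen c.1 c.2 false = true → c ∈ stack ∨
    ∀ v, VC m n v → AdjC c v → diffAt puzzle c v ≤ t → pvMGet seen v.1 v.2 false = true
  src : pvMGet seen 0 0 false = true

structure FloodRel (puzzle : List (List Int)) (m n t x y : Int)
    (st0 st : List (List Bool) × List (Int × Int)) : Prop where
  dims : DimsM m n st.1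
  mono : ∀ c, VC m n c → pvMGet st0.1 c.1 c.2 false = true → pvMGet st.1 c.1 c.2 false = true
  chg : ∀ c, VC m n c →
    pvMGet st.1 c.1 c.2 false = pvMGet st0.1 c.1 c.2 false ∨
    (AdjC (x, y) c ∧ diffAt puzzle (x, y) c ≤ t ∧ pvMGet st.1 c.1 c.2 false = true ∧
      pvMGet st0.1 c.1 c.2 false = false ∧ c ∈ st.2)
  sub : ∀ e ∈ st0.2, e ∈ st.2
  new : ∀ e ∈ st.2, e ∈ st0.2 ∨ (VC m n e ∧ AdjC (x, y) e ∧ diffAt puzzle (x, y) e ≤ t ∧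
    pvMGet st.1 e.1 e.2 false = true)
  phi : st.2.length + pvUnSlack st.1 ≤ st0.2.length + pvUnSlack st0.1

lemma floodRel_refl {puzzle m n t x y st0} (hd : DimsM m n st0.1) :
    FloodRel puzzle m n t x y st0 st0 := by
  refine ⟨hd, fun c _ h => h, fun c _ => Or.inl rfl, fun e he => he,
    fun e he => Or.inl he, le_refl _⟩

lemma floodRel_trans {puzzle m n t x y st0 st1 st2}
    (h1 : FloodRel puzzle m n t x y st0 st1)
    (h2 : FloodRel puzzle m n t x y st1 st2) : FloodRel puzzle m n t x y st0 st2 := by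
  refine ⟨h2.dims, fun c hc h => h2.mono c hc (h1.mono c hc h), ?_,
    fun e he => h2.sub e (h1.sub e he), ?_, le_trans h2.phi h1.phi⟩
  · intro c hc
    rcases h2.chg c hc with he2 | ⟨hadj, hdle, htr, hfa, hmem⟩
    · rcases h1.chg c hc with he1 | ⟨hadj, hdle, htr, hfa, hmem⟩
      · exact Or.inl (he2.trans he1)
      · exact Or.inr ⟨hadj, hdle, by rw [he2]; exact htr, hfa, h2.sub _ hmem⟩
    · refine Or.inr ⟨hadj, hdle, htr, ?_, hmem⟩
      by_cases h0 : pvMGet st0.1 c.1 c.2 false = true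
      · rw [h1.mono c hc h0] at hfa
        exact absurd hfa (by simp)
      · simpa using h0
  · intro e he
    rcases h2.new e he with he1 | ⟨hvc, hadj, hdle, hmk⟩
    · rcases h1.new e he1 with he0 | ⟨hvc, hadj, hdle, hmk⟩
      · exact Or.inl he0
      · exact Or.inr ⟨hvc, hadj, hdle, h2.mono e hvc hmk⟩
    · exact Or.inr ⟨hvc, hadj, hdle, hmk⟩

lemma dirsB_adj (x y : Int) {dir : Int × Int} (hdir : dir ∈ pvDirsB) :
    AdjC (x, y) (x + dir.1, y + dir.2) := by
  simp only [pvDirsB, List.mem_cons, List.not_mem_nil, or_false] at hdir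
  unfold AdjC
  rcases hdir with rfl | rfl | rfl | rfl <;> simp <;> omega

lemma flood_one {puzzle : List (List Int)} {m n t x y : Int}
    {st : List (List Bool) × List (Int × Int)} (hd : DimsM m n st.1)
    {dir : Int × Int} (hdir : dir ∈ pvDirsB) :
    FloodRel puzzle m n t x y st (pvFloodStep puzzle m n t x y st dir) ∧
    (VC m n (x + dir.1, y + dir.2) → diffAt puzzle (x, y) (x + dir.1, y + dir.2) ≤ t →
      pvMGet (pvFloodStep puzzle m n t x y st dir).1 (x + dir.1) (y + dir.2) false = true) := by
  have hadj : AdjC (x, y) (x + dir.1, y + dir.2) := dirsB_adj x y hdir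
  have hdeq : diffAt puzzle (x, y) (x + dir.1, y + dir.2) =
      |pvAt puzzle (x + dir.1) (y + dir.2) - pvAt puzzle x y| := rfl
  by_cases hg : 0 ≤ x + dir.1 ∧ x + dir.1 < m ∧ 0 ≤ y + dir.2 ∧ y + dir.2 < n ∧
      pvMGet st.1 (x + dir.1) (y + dir.2) false = false ∧
      |pvAt puzzle (x + dir.1) (y + dir.2) - pvAt puzzle x y| ≤ t
  · have heq : pvFloodStep puzzle m n t x y st dir =
        (pvMSet st.1 (x + dir.1) (y + dir.2) true, st.2 ++ [(x + dir.1, y + dir.2)]) := by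
      simp only [pvFloodStep, if_pos hg]
    obtain ⟨g1, g2, g3, g4, g5, g6⟩ := hg
    have hvc : VC m n (x + dir.1, y + dir.2) := ⟨g1, g2, g3, g4⟩
    rw [heq]
    constructor
    · refine ⟨dims_mset hd hvc _, ?_, ?_, fun e he => List.mem_append.2 (Or.inl he), ?_, ?_⟩
      · intro c hc h
        by_cases hceq : c = (x + dir.1, y + dir.2)
        · subst hceq
          exact mget_mset_same hd hvc _ _
        · rw [mget_mset_other hd hvc hc hceq _ _]
          exact h
      · intro c hc
        by_cases hceq : c = (x + dir.1, y + dir.2)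
        · subst hceq
          exact Or.inr ⟨hadj, by rw [hdeq]; exact g6, mget_mset_same hd hvc _ _, g5,
            List.mem_append.2 (Or.inr (List.mem_singleton.2 rfl))⟩
        · exact Or.inl (mget_mset_other hd hvc hc hceq _ _)
      · intro e he
        rcases List.mem_append.1 he with he | he
        · exact Or.inl he
        · rw [List.mem_singleton.1 he]
          exact Or.inr ⟨hvc, hadj, by rw [hdeq]; exact g6, mget_mset_same hd hvc _ _⟩
      · have hmeq := mset_measure hd (fun b => if b then 0 else 2) hvc true
        have hdef : pvMGet st.1 (x + dir.1) (y + dir.2) true =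
            pvMGet st.1 (x + dir.1) (y + dir.2) false := by
          rw [mget_eq hd hvc, mget_eq hd hvc]
        rw [hdef, g5] at hmeq
        dsimp only at hmeq
        show (st.2 ++ [(x + dir.1, y + dir.2)]).length +
          pvUnSlack (pvMSet st.1 (x + dir.1) (y + dir.2) true) ≤ st.2.length + pvUnSlack st.1
        rw [List.length_append, List.length_singleton]
        unfold pvUnSlack
        norm_num at hmeq
        omega
    · intro _ _
      exact mget_mset_same hd hvc _ _
  · have heq : pvFloodStep puzzle m n t x y st dir = st := by
      simp only [pvFloodStep, if_neg hg]
    rw [heq]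
    refine ⟨floodRel_refl hd, ?_⟩
    intro hvc hdle
    obtain ⟨g1, g2, g3, g4⟩ := hvc
    rcases hm : pvMGet st.1 (x + dir.1) (y + dir.2) false with _ | _
    · exact absurd ⟨g1, g2, g3, g4, hm, by rw [← hdeq]; exact hdle⟩ hg
    · rfl

lemma flood_fold {puzzle m n t x y st0} (hd : DimsM m n st0.1) :
    FloodRel puzzle m n t x y st0
      (pvDirsB.foldl (fun s d => pvFloodStep puzzle m n t x y s d) st0) ∧
    (∀ v, VC m n v → AdjC (x, y) v → diffAt puzzle (x, y) v ≤ t →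
      pvMGet (pvDirsB.foldl (fun s d => pvFloodStep puzzle m n t x y s d) st0).1
        v.1 v.2 false = true) := by
  have hfold : pvDirsB.foldl (fun s d => pvFloodStep puzzle m n t x y s d) st0 =
      pvFloodStep puzzle m n t x y (pvFloodStep puzzle m n t x y (pvFloodStep puzzle m n t x y
        (pvFloodStep puzzle m n t x y st0 (1,0)) (-1,0)) (0,1)) (0,-1) := by
    simp only [pvDirsB, List.foldl_cons, List.foldl_nil]
  have h1 := flood_one (puzzle := puzzle) (st := st0) (t := t) (x := x) (y := y) hd (dir := ((1:Int),(0:Int))) (by simp [pvDirsB])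
  have r1 := h1.1
  have h2 := flood_one (puzzle := puzzle) (t := t) (x := x) (y := y) r1.dims (dir := ((-1:Int),(0:Int))) (by simp [pvDirsB])
  have r2 := h2.1
  have h3 := flood_one (puzzle := puzzle) (t := t) (x := x) (y := y) r2.dims (dir := ((0:Int),(1:Int))) (by simp [pvDirsB])
  have r3 := h3.1
  have h4 := flood_one (puzzle := puzzle) (t := t) (x := x) (y := y) r3.dims (dir := ((0:Int),(-1:Int))) (by simp [pvDirsB])
  have r4 := h4.1
  rw [hfold]
  constructor
  · exact floodRel_trans r1 (floodRel_trans r2 (floodRel_trans r3 r4))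
  · intro v hvc hadjv hdlev
    rcases adj_cases hadjv with rfl | rfl | rfl | rfl
    · -- v = (x, y + 1): third step
      have hv' : VC m n (x + (0 : Int), y + (1 : Int)) := by simpa using hvc
      have hd' : diffAt puzzle (x, y) (x + (0 : Int), y + (1 : Int)) ≤ t := by
        simpa using hdlev
      have hmk := h3.2 hv' hd'
      simp only [add_zero] at hmk
      exact r4.mono (x, y + 1) hvc hmk
    · -- v = (x, y - 1): fourth step
      have hv' : VC m n (x + (0 : Int), y + (-1 : Int)) := by simpa [sub_eq_add_neg] using hvc
      have hd' : diffAt puzzle (x, y) (x + (0 : Int), y + (-1 : Int)) ≤ t := by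
        simpa [sub_eq_add_neg] using hdlev
      have hmk := h4.2 hv' hd'
      simpa [sub_eq_add_neg] using hmk
    · -- v = (x + 1, y): first step
      have hv' : VC m n (x + (1 : Int), y + (0 : Int)) := by simpa using hvc
      have hd' : diffAt puzzle (x, y) (x + (1 : Int), y + (0 : Int)) ≤ t := by
        simpa using hdlev
      have hmk := h1.2 hv' hd'
      simp only [add_zero] at hmk
      exact (floodRel_trans r2 (floodRel_trans r3 r4)).mono (x + 1, y) hvc hmk
    · -- v = (x - 1, y): second step
      have hv' : VC m n (x + (-1 : Int), y + (0 : Int)) := by simpa [sub_eq_add_neg] using hvc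
      have hd' : diffAt puzzle (x, y) (x + (-1 : Int), y + (0 : Int)) ≤ t := by
        simpa [sub_eq_add_neg] using hdlev
      have hmk := h2.2 hv' hd'
      have hmk' : pvMGet (pvFloodStep puzzle m n t x y (pvFloodStep puzzle m n t x y st0
          (1,0)) (-1,0)).1 (x - 1) (y) false = true := by
        simpa [sub_eq_add_neg] using hmk
      exact (floodRel_trans r3 r4).mono (x - 1, y) hvc hmk'

lemma floodLoop_good {puzzle : List (List Int)} {m n t : Int} (hm : 1 ≤ m) (hn : 1 ≤ n) :
    ∀ (fuel : Nat) (seen : List (List Bool)) (stack : List (Int × Int)),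
      InvB puzzle m n t seen stack → stack.length + pvUnSlack seen < fuel →
      (∀ c, VC m n c →
        (pvMGet (pvFloodLoop puzzle m n t fuel (seen, stack)) c.1 c.2 false = true ↔
          ReachC puzzle m n t (0, 0) c)) := by
  intro fuel
  induction fuel with
  | zero =>
    intro seen stack inv hphi
    exact absurd hphi (by omega)
  | succ fuel ih =>
    intro seen stack inv hphi
    rcases stack with _ | ⟨h, tl⟩
    · have hloop : pvFloodLoop puzzle m n t (fuel + 1) (seen, []) = seen := by
        simp only [pvFloodLoop]
      rw [hloop]
      have hclosed : ∀ c, VC m n c → pvMGet seen c.1 c.2 false = true →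
          ∀ v, VC m n v → AdjC c v → diffAt puzzle c v ≤ t →
            pvMGet seen v.1 v.2 false = true := by
        intro c hc hmk
        rcases inv.closure c hc hmk with hin | hall
        · simp at hin
        · exact hall
      have haux : ∀ (u v : Int × Int), ReachC puzzle m n t u v → VC m n u →
          pvMGet seen u.1 u.2 false = true → pvMGet seen v.1 v.2 false = true := by
        intro u v hr
        induction hr with
        | refl u => exact fun _ h => h
        | cons he hr2 ih2 =>
          intro hu hmk
          exact ih2 he.2.1 (hclosed _ hu hmk _ he.2.1 he.2.2.1 he.2.2.2)
      intro c hc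
      refine ⟨inv.sound c hc, ?_⟩
      intro hr
      exact haux (0, 0) c hr ⟨le_refl _, by omega, le_refl _, by omega⟩ inv.src
    · have hloop : pvFloodLoop puzzle m n t (fuel + 1) (seen, h :: tl) =
          pvFloodLoop puzzle m n t fuel
            (pvDirsB.foldl (fun s d => pvFloodStep puzzle m n t
              ((h :: tl).getLast (List.cons_ne_nil h tl)).1
              ((h :: tl).getLast (List.cons_ne_nil h tl)).2 s d)
              (seen, (h :: tl).dropLast)) := by
        simp only [pvFloodLoop]
      rw [hloop]
      set e := (h :: tl).getLast (List.cons_ne_nil h tl) with hedef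
      have he_mem : e ∈ h :: tl := List.getLast_mem _
      have hsplit : h :: tl = (h :: tl).dropLast ++ [e] := by
        rw [hedef]
        exact (List.dropLast_append_getLast (List.cons_ne_nil h tl)).symm
      obtain ⟨hevc, hemk⟩ := inv.stackMem e he_mem
      have hereach : ReachC puzzle m n t (0, 0) e := inv.sound e hevc hemk
      set stN := pvDirsB.foldl (fun s d => pvFloodStep puzzle m n t e.1 e.2 s d)
        (seen, (h :: tl).dropLast) with hstN
      obtain ⟨R, F5⟩ := flood_fold (puzzle := puzzle) (t := t) (x := e.1) (y := e.2)
        (st0 := (seen, (h :: tl).dropLast)) inv.dims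
      rw [← hstN] at R F5
      have inv' : InvB puzzle m n t stN.1 stN.2 := by
        refine ⟨R.dims, ?_, ?_, ?_, ?_⟩
        · intro c hc hmk
          rcases R.chg c hc with hchg | ⟨hadj, hdle, _, _, _⟩
          · rw [hchg] at hmk
            exact inv.sound c hc hmk
          · exact reach_snoc hereach ⟨hevc, hc, hadj, hdle⟩
        · intro c hcmem
          rcases R.new c hcmem with hrest | ⟨hvc, _, _, hmk⟩
          · have hcs : c ∈ h :: tl := by
              rw [hsplit]
              exact List.mem_append.2 (Or.inl hrest)
            obtain ⟨hvc, hmk⟩ := inv.stackMem c hcs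
            exact ⟨hvc, R.mono c hvc hmk⟩
          · exact ⟨hvc, hmk⟩
        · intro c hc hmk
          rcases R.chg c hc with hchg | ⟨_, _, _, _, hmem⟩
          · rw [hchg] at hmk
            rcases inv.closure c hc hmk with hin | hall
            · rw [hsplit] at hin
              rcases List.mem_append.1 hin with hin | hin
              · exact Or.inl (R.sub c hin)
              · rw [List.mem_singleton.1 hin]
                refine Or.inr ?_
                intro v hv hadj hdle
                exact F5 v hv hadj hdle
            · refine Or.inr ?_
              intro v hv hadj hdle
              exact R.mono v hv (hall v hv hadj hdle)
          · exact Or.inl hmem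
        · exact R.mono (0, 0) ⟨le_refl _, by omega, le_refl _, by omega⟩ inv.src
      have hlen : (h :: tl).length = (h :: tl).dropLast.length + 1 := by
        rw [hsplit]
        simp
      have hphi' : stN.2.length + pvUnSlack stN.1 < fuel := by
        have := R.phi
        dsimp only at this
        omega
      intro c hc
      exact ih stN.1 stN.2 inv' hphi' c hc

lemma connects_iff (puzzle : List (List Int)) (m n t : Int) (hm : 1 ≤ m) (hn : 1 ≤ n) :
    pvConnects puzzle m n t = true ↔ ReachC puzzle m n t (0, 0) (m - 1, n - 1) := by
  have hvc00 : VC m n ((0 : Int), (0 : Int)) := ⟨le_refl _, by omega, le_refl _, by omega⟩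
  have hvcdest : VC m n ((m - 1 : Int), (n - 1 : Int)) := ⟨by omega, by omega, by omega, by omega⟩
  have hdinit := dims_init (α := Bool) m n false
  have hd0 : DimsM m n (pvMSet ((PySem.List.pyRange 0 m 1).map
      (fun _ => List.replicate n.toNat false)) 0 0 true) := dims_mset hdinit hvc00 _
  have hsrc : pvMGet (pvMSet ((PySem.List.pyRange 0 m 1).map
      (fun _ => List.replicate n.toNat false)) 0 0 true) 0 0 false = true :=
    mget_mset_same hdinit hvc00 _ _
  have hmarked0 : ∀ c : Int × Int, VC m n c → pvMGet (pvMSet ((PySem.List.pyRange 0 m 1).map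
      (fun _ => List.replicate n.toNat false)) 0 0 true) c.1 c.2 false = true → c = (0, 0) := by
    intro c hc hmk
    by_contra hne
    rw [mget_mset_other hdinit hvc00 hc hne _ _, mget_init m n false hc] at hmk
    exact absurd hmk (by simp)
  have inv0 : InvB puzzle m n t (pvMSet ((PySem.List.pyRange 0 m 1).map
      (fun _ => List.replicate n.toNat false)) 0 0 true) [(0, 0)] := by
    refine ⟨hd0, ?_, ?_, ?_, hsrc⟩
    · intro c hc hmk
      rw [hmarked0 c hc hmk]
      exact ReachC.refl _
    · intro c hcmem
      rw [List.mem_singleton.1 hcmem]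
      exact ⟨hvc00, hsrc⟩
    · intro c hc hmk
      exact Or.inl (by rw [hmarked0 c hc hmk]; exact List.mem_singleton.2 rfl)
  have hub : pvUnSlack (pvMSet ((PySem.List.pyRange 0 m 1).map
      (fun _ => List.replicate n.toNat false)) 0 0 true) ≤ m.toNat * (n.toNat * 2) := by
    unfold pvUnSlack
    rw [← hd0.1]
    apply sum_map_le
    intro r hr
    have hrl := hd0.2 r hr
    rw [← hrl]
    apply sum_map_le
    intro b _
    by_cases hb : b = true <;> simp [hb]
  have hmn : (m * n).toNat = m.toNat * n.toNat := by
    conv_lhs => rw [← Int.toNat_of_nonneg (show (0:Int) ≤ m by omega),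
      ← Int.toNat_of_nonneg (show (0:Int) ≤ n by omega)]
    rw [← Int.natCast_mul, Int.toNat_natCast]
  have hfuel : [((0:Int), (0:Int))].length + pvUnSlack (pvMSet ((PySem.List.pyRange 0 m 1).map
      (fun _ => List.replicate n.toNat false)) 0 0 true) < (m * n).toNat * 2 + 2 := by
    rw [List.length_singleton, hmn]
    have : m.toNat * (n.toNat * 2) = m.toNat * n.toNat * 2 := by ring
    omega
  have hiff := floodLoop_good (t := t) (puzzle := puzzle) hm hn _ _ _ inv0 hfuel
    (m - 1, n - 1) hvcdest
  exact hiff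

lemma scanB_spec (puzzle : List (List Int)) (m n : Int) :
    ∀ (ws : List Int), ws.Pairwise (· ≤ ·) →
      ∀ c ∈ ws, pvConnects puzzle m n c = true →
      pvScanB puzzle m n ws ∈ ws ∧ pvConnects puzzle m n (pvScanB puzzle m n ws) = true ∧
        pvScanB puzzle m n ws ≤ c := by
  intro ws
  induction ws with
  | nil => intro _ c hc; simp at hc
  | cons h tws ih =>
    intro hpair c hc hcc
    by_cases hh : pvConnects puzzle m n h = true
    · simp only [pvScanB, if_pos hh]
      refine ⟨List.mem_cons_self, hh, ?_⟩
      rcases List.mem_cons.1 hc with rfl | hc'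
      · exact le_refl _
      · exact (List.pairwise_cons.1 hpair).1 c hc'
    · simp only [pvScanB, if_neg hh]
      have hc' : c ∈ tws := by
        rcases List.mem_cons.1 hc with rfl | hc'
        · exact absurd hcc hh
        · exact hc'
      obtain ⟨h1, h2, h3⟩ := ih (List.pairwise_cons.1 hpair).2 c hc' hcc
      exact ⟨List.mem_cons_of_mem _ h1, h2, h3⟩

lemma minEffort_alt_good (puzzle : List (List Int)) (hpre : Pre_minEffort puzzle) :
    GoodOut puzzle (PySem.List.len puzzle)
      (PySem.List.len (PySem.List.pyGetD puzzle 0 [])) (minEffort_alt puzzle) := by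
  obtain ⟨hne, hrow, hlen⟩ := hpre
  rcases puzzle with _ | ⟨r0, rest⟩
  · exact absurd rfl hne
  have hget0 : PySem.List.pyGetD (r0 :: rest) 0 [] = r0 := by
    simp [PySem.List.pyGetD, PySem.List.pyGet?_zero_cons]
  have hhead : (r0 :: rest).headD [] = r0 := rfl
  set puzzle := r0 :: rest with hpz
  set m := PySem.List.len puzzle with hmdef
  set n := PySem.List.len (PySem.List.pyGetD puzzle 0 []) with hndef
  have hmlen : m = (puzzle.length : Int) := PySem.List.len_eq puzzle
  have hnlen : n = (r0.length : Int) := by rw [hndef, hget0]; exact PySem.List.len_eq r0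
  have hm : 1 ≤ m := by rw [hmlen, hpz]; simp
  have hn : 1 ≤ n := by rw [hnlen]; rw [hhead] at hrow; omega
  have hvcdest : VC m n ((m - 1 : Int), (n - 1 : Int)) := ⟨by omega, by omega, by omega, by omega⟩
  have heq : minEffort_alt puzzle = if m = 1 ∧ n = 1 then 0
      else pvScanB puzzle m n (PySem.List.sorted (pvWeights puzzle m n) (fun c => c) false) := rfl
  rw [heq]
  by_cases h11 : m = 1 ∧ n = 1
  · rw [if_pos h11]
    refine ⟨le_refl _, ?_, fun t ht _ => ht⟩
    have : ((m - 1 : Int), (n - 1 : Int)) = ((0 : Int), (0 : Int)) := by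
      rw [h11.1, h11.2]
      norm_num
    rw [this]
    exact ReachC.refl _
  · rw [if_neg h11]
    have h11' : m ≠ 1 ∨ n ≠ 1 := by
      by_contra hc
      push_neg at hc
      exact h11 ⟨hc.1, hc.2⟩
    have hne_s : ((0 : Int), (0 : Int)) ≠ ((m - 1 : Int), (n - 1 : Int)) := by
      intro hcontra
      have h1 := congrArg Prod.fst hcontra
      have h2 := congrArg Prod.snd hcontra
      simp only at h1 h2
      omega
    set ws := PySem.List.sorted (pvWeights puzzle m n) (fun c => c) false with hws
    have hpair : ws.Pairwise (· ≤ ·) := PySem.List.sorted_pairwise _ _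
    have hmemiff : ∀ a : Int, a ∈ ws ↔ a ∈ pvWeights puzzle m n := fun a =>
      (PySem.List.sorted_perm (pvWeights puzzle m n) (fun c => c) false).mem_iff
    have hreachK : ReachC puzzle m n (2 * pvAbsSum puzzle) (0, 0) (m - 1, n - 1) :=
      all_reach puzzle m n _ (m - 1, n - 1) hvcdest (le_refl _)
    rcases reach_bottleneck hreachK with hcontra | ⟨c, hcW, hc0, hcK, hcr⟩
    · exact absurd hcontra hne_s
    · have hcws : c ∈ ws := (hmemiff c).2 hcW
      have hcconn : pvConnects puzzle m n c = true := (connects_iff puzzle m n c hm hn).2 hcr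
      obtain ⟨hrmem, hrconn, hrle⟩ := scanB_spec puzzle m n ws hpair c hcws hcconn
      refine ⟨weights_nonneg puzzle m n _ ((hmemiff _).1 hrmem),
        (connects_iff puzzle m n _ hm hn).1 hrconn, ?_⟩
      intro t ht hreach
      rcases reach_bottleneck hreach with hcontra | ⟨c', hc'W, hc'0, hc't, hc'r⟩
      · exact absurd hcontra hne_s
      · have h3 := (scanB_spec puzzle m n ws hpair c' ((hmemiff c').2 hc'W)
          ((connects_iff puzzle m n c' hm hn).2 hc'r)).2.2
        omega

-- ===== VERDICT (by name: the statement is the Claim_ definition above) =====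
theorem minEffort_spec : Claim_equal_minEffort := by
  intro puzzle _ hpre
  unfold Spec_minEffort
  exact goodOut_unique (minEffort_good puzzle hpre) (minEffort_alt_good puzzle hpre)
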